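-- pv_equiv track=rewrite | github.com/kinghusnain/advent-of-code | advent18_many_worlds.py | graph_from_tiles
-- ===== SOURCE A (Python) =====
-- KEY_TILES = 'abcdefghijklmnopqrstuvwxyz'
--
-- DOOR_TILES = 'ABCDEFGHIJKLMNOPQRSTUVWXYZ'
--
-- def graph_from_tiles(tiles):
--   """
--   >>> graph_from_tiles('''
--   ... #########
--   ... #b.A.@.a#
--   ... #########
--   ... ''')
--   {'b': {'A': 2}, 'A': {'b': 2, 'a': 4}, '@': {'A': 2, 'a': 2}, 'a': {'A': 4}}
--   >>> graph_from_tiles('''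
--   ... ########################
--   ... #@..............ac.GI.b#
--   ... ###d#e#f################
--   ... ###A#B#C################
--   ... ###g#h#i################
--   ... ########################
--   ... ''')
--   {'@': {'d': 3, 'e': 5, 'f': 7, 'a': 15}, 'a': {'c': 1, 'f': 10, 'e': 12, 'd': 14}, 'c': {'a': 1, 'G': 2}, 'G': {'I': 1, 'c': 2}, 'I': {'G': 1, 'b': 2}, 'b': {'I': 2}, 'd': {'A': 1, 'e': 4, 'f': 6, 'a': 14}, 'e': {'B': 1, 'd': 4, 'f': 4, 'a': 12}, 'f': {'C': 1, 'e': 4, 'd': 6, 'a': 10}, 'A': {'d': 1, 'g': 1}, 'B': {'e': 1, 'h': 1}, 'C': {'f': 1, 'i': 1}, 'g': {'A': 1}, 'h': {'B': 1}, 'i': {'C': 1}}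
--   """
--   tile_grid = tiles.strip().split('\n')
--   grid_height = len(tile_grid)
--   grid_width = len(tile_grid[0])
--   graph = {}
--   for y in range(grid_height):
--     for x in range(grid_width):
--       tile = tile_grid[y][x]
--       if tile in '@'+KEY_TILES+DOOR_TILES:
--         graph[tile] = exits_from_landmark(tile_grid, (x, y))
--   return graph
--
-- def exits_from_landmark(tile_map, origin):
--   """
--
--   >>> exits_from_landmark([
--   ...     '#########',
--   ...     '#b.A.@.a#',
--   ...     '#########'], (1, 1))
--   {'A': 2}
--   >>> exits_from_landmark([
--   ...     '#########',
--   ...     '#b.A.@.a#',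
--   ...     '#########'], (3, 1))
--   {'b': 2, 'a': 4}
--   >>> exits_from_landmark([
--   ...     '#########',
--   ...     '#b.A.@.a#',
--   ...     '#########'], (5, 1))
--   {'A': 2, 'a': 2}
--   """
--   space_tiles = '.@'
--   h, w = len(tile_map), len(tile_map[0])
--   orig_x, orig_y = origin
--   tile = tile_map[orig_y][orig_x]
--   reachablity_map = [[False for _ in row] for row in tile_map]
--   reachablity_map[orig_y][orig_x] = True
--   done = False
--   steps = 0
--   exits = {}
--   while not done:
--     map_iter = [[val for val in row] for row in reachablity_map]
--     steps += 1
--     for y in range(h):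
--       for x in range(w):
--         if reachablity_map[y][x]:
--           north_tile = tile_map[y - 1][x] if y - 1 >= 0 else '??'
--           south_tile = tile_map[y + 1][x] if y + 1 < h else '??'
--           west_tile = tile_map[y][x - 1] if x - 1 >= 0 else '??'
--           east_tile = tile_map[y][x + 1] if x + 1 < w else '??'
--
--           # Add adjacent keys and doors to `exits`.
--           for t in [north_tile, south_tile, west_tile, east_tile]:
--             if t in KEY_TILES+DOOR_TILES and t not in exits and t != tile:
--               exits[t] = steps
--
--           # Mark adjacent spaces as reachable.
--           if north_tile in space_tiles:
--             map_iter[y - 1][x] = True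
--           if south_tile in space_tiles:
--             map_iter[y + 1][x] = True
--           if west_tile in space_tiles:
--             map_iter[y][x - 1] = True
--           if east_tile in space_tiles:
--             map_iter[y][x + 1] = True
--     done = map_iter == reachablity_map
--     reachablity_map = [[val for val in row] for row in map_iter]
--   return exits
-- ===== SOURCE B (Python) =====
-- KEY_TILES = 'abcdefghijklmnopqrstuvwxyz'
--
-- DOOR_TILES = 'ABCDEFGHIJKLMNOPQRSTUVWXYZ'
--
-- def graph_from_tiles(tiles):
--   # Crop to a w-wide rectangle once, scan it by enumeration, and run one
--   # layered BFS per landmark (sets + sorted set-difference per layer).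
--   rows = tiles.strip().split('\n')
--   w = len(rows[0])
--   grid = [row[:w] for row in rows]
--   h = len(grid)
--   graph = {}
--   for y, row in enumerate(grid):
--     for x, t in enumerate(row):
--       if t == '@' or _is_letter(t):
--         graph[t] = _exits(grid, h, w, y, x, t)
--   return graph
--
-- def _is_letter(c):
--   return 'a' <= c <= 'z' or 'A' <= c <= 'Z'
--
-- def _exits(grid, h, w, oy, ox, origin):
--   seen = {(oy, ox)}
--   layer = [(oy, ox)]
--   exits = {}
--   dist = 0
--   while layer:
--     dist += 1
--     nxt = set()
--     for y, x in layer: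
--       for dy, dx in ((-1, 0), (1, 0), (0, -1), (0, 1)):
--         ny, nx = y + dy, x + dx
--         if 0 <= ny < h and 0 <= nx < w:
--           c = grid[ny][nx]
--           if _is_letter(c) and c != origin and c not in exits:
--             exits[c] = dist
--           if c == '.' or c == '@':
--             nxt.add((ny, nx))
--     layer = sorted(nxt - seen, key=lambda p: p[0] * w + p[1])
--     seen |= nxt
--   return exits
-- ===== Notes on version B (the rewrite author's own statement) =====
-- stated objective: faster
-- what changed: Per landmark, A repeatedly re-sweeps the entire grid (one full scan per distance layer, until a fixpoint of the reachability matrix); B crops the input to a rectangle once, scans it by enumeration, and runs a single layered breadth-first search per landmark using per-layer neighbour sets and a sorted set-difference frontier, so each free tile is processed once per landmark.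
import Mathlib
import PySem

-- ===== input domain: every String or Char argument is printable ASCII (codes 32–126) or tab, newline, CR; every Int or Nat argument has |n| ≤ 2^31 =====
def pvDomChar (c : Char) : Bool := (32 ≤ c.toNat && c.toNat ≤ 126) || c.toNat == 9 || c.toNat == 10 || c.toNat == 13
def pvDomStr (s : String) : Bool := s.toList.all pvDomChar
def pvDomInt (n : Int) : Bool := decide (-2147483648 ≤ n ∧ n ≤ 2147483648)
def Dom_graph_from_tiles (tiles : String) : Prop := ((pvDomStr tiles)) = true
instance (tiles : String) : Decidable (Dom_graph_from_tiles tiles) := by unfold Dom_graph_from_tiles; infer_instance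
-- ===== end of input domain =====

-- B replaces A's repeated full-grid fixpoint sweeps per landmark by one layered breadth-first
-- search per landmark over a cropped rectangular grid (per-layer neighbour sets, sorted
-- set-difference frontier), an asymptotically faster exact re-implementation.

-- ===== PORT A =====
-- module constants KEY_TILES / DOOR_TILES and the space tiles '.@' as A reads them
def pvKeyTiles : List Char := "abcdefghijklmnopqrstuvwxyz".toList
def pvDoorTiles : List Char := "ABCDEFGHIJKLMNOPQRSTUVWXYZ".toList
def pvSpaceTiles : List Char := ['.', '@']
-- tile_map[y][x] as A reads it (the '?' default is never returned on admitted reads)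
def pvTileAt (tm : List (List Char)) (y x : Int) : Char :=
  PySem.List.pyGetD (PySem.List.pyGetD tm y []) x '?'

-- map_iter[y][x] = True  (guarded nonneg indices; out-of-range set is the identity, as pySetD)
def pvSet2 (m : List (List Bool)) (y x : Int) (v : Bool) : List (List Bool) :=
  PySem.List.pySetD m y (PySem.List.pySetD (PySem.List.pyGetD m y []) x v)

-- 'if t in KEY_TILES+DOOR_TILES and t not in exits and t != tile: exits[t] = steps'
def pvExitAddA (tile : Char) (steps : Int) (E : PySem.Dict String Int) (t : List Char) :
    PySem.Dict String Int :=
  if PySem.Chars.isIn t (pvKeyTiles ++ pvDoorTiles) && !(E.contains (String.ofList t))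
       && !(t == [tile]) then E.insert (String.ofList t) steps else E

-- the body of A's sweep for one reachable cell (x, y): 4 neighbour tiles ('??' sentinel when
-- off-grid), the exits loop, then the four marking ifs
def pvCellA (tm : List (List Char)) (h w : Int) (tile : Char) (steps : Int)
    (st : List (List Bool) × PySem.Dict String Int) (p : Int × Int) :
    List (List Bool) × PySem.Dict String Int :=
  let x := p.1; let y := p.2
  let north := if y - 1 ≥ 0 then [pvTileAt tm (y-1) x] else ['?','?']
  let south := if y + 1 < h then [pvTileAt tm (y+1) x] else ['?','?']
  let west  := if x - 1 ≥ 0 then [pvTileAt tm y (x-1)] else ['?','?']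
  let east  := if x + 1 < w then [pvTileAt tm y (x+1)] else ['?','?']
  let E := [north, south, west, east].foldl (pvExitAddA tile steps) st.2
  let M := st.1
  let M := if PySem.Chars.isIn north pvSpaceTiles then pvSet2 M (y-1) x true else M
  let M := if PySem.Chars.isIn south pvSpaceTiles then pvSet2 M (y+1) x true else M
  let M := if PySem.Chars.isIn west pvSpaceTiles then pvSet2 M y (x-1) true else M
  let M := if PySem.Chars.isIn east pvSpaceTiles then pvSet2 M y (x+1) true else M
  (M, E)

-- one 'while' iteration body: the double for-loop over the grid, scanning reachablity_map
def pvSweepA (tm : List (List Char)) (h w : Int) (tile : Char) (R : List (List Bool))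
    (steps : Int) (E : PySem.Dict String Int) :
    List (List Bool) × PySem.Dict String Int :=
  (PySem.List.pyRange 0 h 1).foldl (fun st y =>
    (PySem.List.pyRange 0 w 1).foldl (fun st x =>
      if PySem.List.pyGetD (PySem.List.pyGetD R y []) x false then
        pvCellA tm h w tile steps st (x, y)
      else st) st) (R, E)

-- 'while not done' (fuel only makes the loop total; h*w+2 iterations always reach the fixpoint)
def pvLoopA (tm : List (List Char)) (h w : Int) (tile : Char) :
    Nat → List (List Bool) → Int → PySem.Dict String Int → PySem.Dict String Int
  | 0, _, _, E => E
  | f+1, R, steps, E =>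
    let st := pvSweepA tm h w tile R (steps+1) E
    if st.1 == R then st.2 else pvLoopA tm h w tile f st.1 (steps+1) st.2

def pvExitsFromLandmarkA (tm : List (List Char)) (origin : Int × Int) : PySem.Dict String Int :=
  let h : Int := PySem.List.len tm
  let w : Int := PySem.List.len (PySem.List.pyGetD tm 0 [])
  let tile := pvTileAt tm origin.2 origin.1
  let R0 := pvSet2 (tm.map (fun row => row.map (fun _ => false))) origin.2 origin.1 true
  pvLoopA tm h w tile ((h*w).toNat + 2) R0 0 PySem.Dict.empty

def graph_from_tiles (tiles : String) : List (String × List (String × Int)) :=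
  let tm := ((PySem.Str.split? (PySem.Str.strip tiles) "\n").getD []).map String.toList
  let h : Int := PySem.List.len tm
  let w : Int := PySem.List.len (PySem.List.pyGetD tm 0 [])
  ((PySem.List.pyRange 0 h 1).foldl (fun g y =>
    (PySem.List.pyRange 0 w 1).foldl (fun g x =>
      let tile := pvTileAt tm y x
      if PySem.Chars.isIn [tile] ('@' :: (pvKeyTiles ++ pvDoorTiles)) then
        g.insert (String.ofList [tile]) (pvExitsFromLandmarkA tm (x, y)).items
      else g) g) (PySem.Dict.empty : PySem.Dict String (List (String × Int)))).items

-- ===== PORT B =====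
-- "'a' <= c <= 'z' or 'A' <= c <= 'Z'" (code-point comparisons, as Python compares str)
def pvLet (c : Char) : Bool := ('a' ≤ c && c ≤ 'z') || ('A' ≤ c && c ≤ 'Z')

-- grid[y][x] on B's cropped grid (default never returned on guarded reads)
def pvAt (g : List (List Char)) (y x : Int) : Char :=
  PySem.List.pyGetD (PySem.List.pyGetD g y []) x ' '

-- the body of Source B's inner 'for dy, dx in ...' loop for one neighbour n = (ny, nx):
-- record an adjacent letter into exits, collect an adjacent free cell into the set nxt
def pvNStep (g : List (List Char)) (h w : Int) (origin : Char) (dist : Int)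
    (st : PySem.Set (Int × Int) × PySem.Dict String Int) (n : Int × Int) :
    PySem.Set (Int × Int) × PySem.Dict String Int :=
  if 0 ≤ n.1 && n.1 < h && 0 ≤ n.2 && n.2 < w then
    let c := pvAt g n.1 n.2
    let E := if pvLet c && !(c == origin) && !(st.2.contains (String.ofList [c])) then
               st.2.insert (String.ofList [c]) dist
             else st.2
    let N := if c == '.' || c == '@' then PySem.Set.add st.1 n else st.1
    (N, E)
  else st

-- the inner 'for dy, dx in ((-1,0),(1,0),(0,-1),(0,1))' of one frontier cell p = (y, x)
def pvScan (g : List (List Char)) (h w : Int) (origin : Char) (dist : Int)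
    (st : PySem.Set (Int × Int) × PySem.Dict String Int) (p : Int × Int) :
    PySem.Set (Int × Int) × PySem.Dict String Int :=
  [((-1 : Int), (0 : Int)), (1, 0), (0, -1), (0, 1)].foldl (fun st d =>
    pvNStep g h w origin dist st (p.1 + d.1, p.2 + d.2)) st

-- 'while layer:' — one BFS layer per iteration; the next layer is sorted(nxt - seen) in
-- row-major order and seen |= nxt  (fuel only makes the loop total)
def pvBfs (g : List (List Char)) (h w : Int) (origin : Char) :
    Nat → PySem.Set (Int × Int) → List (Int × Int) → Int → PySem.Dict String Int →
      PySem.Dict String Int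
  | 0, _, _, _, E => E
  | f+1, seen, layer, dist, E =>
    if layer.isEmpty then E
    else
      let st := layer.foldl (pvScan g h w origin (dist+1)) (PySem.Set.ofList [], E)
      pvBfs g h w origin f (PySem.Set.union seen st.1)
        (PySem.List.sorted (PySem.Set.diff st.1 seen) (fun p => p.1 * w + p.2) false)
        (dist+1) st.2

def graph_from_tiles_alt (tiles : String) : List (String × List (String × Int)) :=
  let rows := ((PySem.Str.split? (PySem.Str.strip tiles) "\n").getD []).map String.toList
  let w : Int := PySem.List.len (PySem.List.pyGetD rows 0 [])
  let grid := rows.map (fun row => PySem.List.slice row none (some w))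
  let h : Int := PySem.List.len grid
  ((PySem.List.enumerate grid 0).foldl (fun gr yrow =>
      (PySem.List.enumerate yrow.2 0).foldl (fun gr xt =>
        if xt.2 == '@' || pvLet xt.2 then
          gr.insert (String.ofList [xt.2])
            (pvBfs grid h w xt.2 ((h*w).toNat + 2)
              (PySem.Set.ofList [(yrow.1, xt.1)]) [(yrow.1, xt.1)] 0 PySem.Dict.empty).items
        else gr) gr)
    (PySem.Dict.empty : PySem.Dict String (List (String × Int)))).items

-- ===== PRECONDITION & SPEC =====
-- Pre_ excludes exactly the inputs on which Python A raises IndexError: a line of the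
-- stripped input shorter than the first line (the code indexes every line up to the first
-- line's width).
def Pre_graph_from_tiles (tiles : String) : Prop :=
  ∀ row ∈ ((PySem.Str.split? (PySem.Str.strip tiles) "\n").getD []).map String.toList,
    (PySem.List.pyGetD (((PySem.Str.split? (PySem.Str.strip tiles) "\n").getD []).map
       String.toList) 0 []).length ≤ row.length
instance (tiles : String) : Decidable (Pre_graph_from_tiles tiles) := by
  unfold Pre_graph_from_tiles; infer_instance

def pvWitness_graph_from_tiles : String := "#####\n#a.@#\n#####"

def Spec_graph_from_tiles (tiles : String) (out : List (String × List (String × Int))) : Prop :=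
  out = graph_from_tiles_alt tiles
instance (tiles : String) (out : List (String × List (String × Int))) :
    Decidable (Spec_graph_from_tiles tiles out) := by unfold Spec_graph_from_tiles; infer_instance

-- ===== CLAIM (what is proved, stated in full; the proofs are below) =====
def Claim_equal_graph_from_tiles : Prop := ∀ (tiles : String), Dom_graph_from_tiles tiles →
  Pre_graph_from_tiles tiles → Spec_graph_from_tiles tiles (graph_from_tiles tiles)

-- ===== LEMMAS AND PROOFS =====

-- ---------- proof-side intermediate: the frontier-list formulation of B's BFS ----------
-- (used only to factor the proof: A's fixpoint sweeps are first related to this layered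
-- frontier loop over the uncropped grid, which is then related to the port of B)
def pvExitAddB (tile : Char) (steps : Int) (E : PySem.Dict String Int) (c : Char) :
    PySem.Dict String Int :=
  if PySem.Chars.isIn [c] (pvKeyTiles ++ pvDoorTiles) && !(E.contains (String.ofList [c]))
       && !(c == tile) then E.insert (String.ofList [c]) steps else E

def pvCellB (tm : List (List Char)) (h w : Int) (tile : Char) (steps : Int)
    (st : PySem.Set (Int × Int) × List (Int × Int) × PySem.Dict String Int) (p : Int × Int) :
    PySem.Set (Int × Int) × List (Int × Int) × PySem.Dict String Int :=
  [(p.1, p.2 - 1), (p.1, p.2 + 1), (p.1 - 1, p.2), (p.1 + 1, p.2)].foldl (fun st q =>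
    if 0 ≤ q.1 && q.1 < w && 0 ≤ q.2 && q.2 < h then
      let c := pvTileAt tm q.2 q.1
      let E := pvExitAddB tile steps st.2.2 c
      if PySem.Chars.isIn [c] pvSpaceTiles && !(st.1.contains q) then
        (PySem.Set.add st.1 q, st.2.1 ++ [q], E)
      else (st.1, st.2.1, E)
    else st) st

def pvLoopB (tm : List (List Char)) (h w : Int) (tile : Char) :
    Nat → PySem.Set (Int × Int) → List (Int × Int) → Int → PySem.Dict String Int →
      PySem.Dict String Int
  | 0, _, _, _, E => E
  | f+1, V, F, steps, E =>
    if F == [] then E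
    else
      let st := F.foldl (pvCellB tm h w tile (steps+1)) (V, [], E)
      pvLoopB tm h w tile f st.1
        (PySem.List.sorted st.2.1 (fun q => q.2 * w + q.1) false) (steps+1) st.2.2

def pvBfsExitsB (tm : List (List Char)) (h w : Int) (ox oy : Int) : PySem.Dict String Int :=
  let tile := pvTileAt tm oy ox
  pvLoopB tm h w tile ((h*w).toNat + 2) (PySem.Set.ofList [(ox, oy)]) [(ox, oy)] 0
    PySem.Dict.empty

def pvGraphMid (tiles : String) : List (String × List (String × Int)) :=
  let tm := ((PySem.Str.split? (PySem.Str.strip tiles) "\n").getD []).map String.toList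
  let h : Int := PySem.List.len tm
  let w : Int := PySem.List.len (PySem.List.pyGetD tm 0 [])
  ((PySem.List.pyRange 0 h 1).foldl (fun g y =>
    (PySem.List.pyRange 0 w 1).foldl (fun g x =>
      let tile := pvTileAt tm y x
      if PySem.Chars.isIn [tile] ('@' :: (pvKeyTiles ++ pvDoorTiles)) then
        g.insert (String.ofList [tile]) (pvBfsExitsB tm h w x y).items
      else g) g) (PySem.Dict.empty : PySem.Dict String (List (String × Int)))).items

-- ---------- generic fold lemmas ----------
theorem pvFoldlRel {σ τ α : Type} (Rel : σ → τ → Prop) (f : σ → α → σ) (g : τ → α → τ) :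
    ∀ (l : List α) (s : σ) (t : τ), (∀ s t a, a ∈ l → Rel s t → Rel (f s a) (g t a)) →
      Rel s t → Rel (l.foldl f s) (l.foldl g t)
  | [], s, t, _, h => h
  | a :: l, s, t, hstep, h =>
    pvFoldlRel Rel f g l (f s a) (g t a)
      (fun s t b hb hr => hstep s t b (List.mem_cons_of_mem _ hb) hr)
      (hstep s t a List.mem_cons_self h)

theorem pvFoldlFixed {σ α : Type} (f : σ → α → σ) :
    ∀ (l : List α) (s : σ), (∀ a ∈ l, f s a = s) → l.foldl f s = s
  | [], _, _ => rfl
  | a :: l, s, h => by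
    have h1 : f s a = s := h a List.mem_cons_self
    simp only [List.foldl_cons, h1]
    exact pvFoldlFixed f l s (fun b hb => h b (List.mem_cons_of_mem _ hb))

theorem pvFoldlPers {σ α : Type} (step : σ → α → σ) (P : σ → Prop)
    (hpers : ∀ s a, P s → P (step s a)) :
    ∀ (l : List α) (s : σ), P s → P (l.foldl step s)
  | [], _, h => h
  | a :: l, s, h => pvFoldlPers step P hpers l (step s a) (hpers s a h)

theorem pvFoldlEstab {σ α : Type} (step : σ → α → σ) (Q : α → σ → Prop)
    (hstep : ∀ s a, Q a (step s a)) (hpers : ∀ s a b, Q b s → Q b (step s a)) :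
    ∀ (l : List α) (s : σ), ∀ a ∈ l, Q a (l.foldl step s)
  | a :: l, s, b, hb => by
    rcases List.mem_cons.1 hb with rfl | hb'
    · simp only [List.foldl_cons]
      exact pvFoldlPers step (Q b) (fun s a h => hpers s a b h) l (step s b) (hstep s b)
    · exact pvFoldlEstab step Q hstep hpers l (step s a) b hb'

-- ---------- geometry ----------
def pvInRange (h w : Int) (q : Int × Int) : Prop := 0 ≤ q.1 ∧ q.1 < w ∧ 0 ≤ q.2 ∧ q.2 < h

def pvGuard (h w : Int) (q : Int × Int) : Bool := 0 ≤ q.1 && q.1 < w && 0 ≤ q.2 && q.2 < h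

theorem pvGuard_iff (h w : Int) (q : Int × Int) : pvGuard h w q = true ↔ pvInRange h w q := by
  simp [pvGuard, pvInRange]; omega

def pvKeyOf (w : Int) (q : Int × Int) : Int := q.2 * w + q.1

def pvCells (h w : Int) : List (Int × Int) :=
  (PySem.List.pyRange 0 h 1).flatMap (fun y => (PySem.List.pyRange 0 w 1).map (fun x => (x, y)))

theorem pvMem_cells (h w : Int) (q : Int × Int) : q ∈ pvCells h w ↔ pvInRange h w q := by
  simp only [pvCells, List.mem_flatMap, List.mem_map, PySem.List.mem_pyRange_one, pvInRange]
  constructor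
  · rintro ⟨y, hy, x, hx, rfl⟩; omega
  · rintro ⟨h1, h2, h3, h4⟩; exact ⟨q.2, by omega, q.1, by omega, rfl⟩

theorem pvCells_pairwise (h w : Int) :
    (pvCells h w).Pairwise (fun a b => pvKeyOf w a < pvKeyOf w b) := by
  apply List.pairwise_flatMap.2
  constructor
  · intro y _
    refine List.pairwise_map.2 ?_
    refine (PySem.List.pairwise_lt_pyRange_one 0 w).imp ?_
    intro a b hab
    simp only [pvKeyOf]; omega
  · apply List.Pairwise.imp_of_mem ?_ (PySem.List.pairwise_lt_pyRange_one 0 h)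
    intro y y' hy hy' hlt p hp q hq
    simp only [List.mem_map, PySem.List.mem_pyRange_one] at hp hq
    obtain ⟨x, hx, rfl⟩ := hp
    obtain ⟨x', hx', rfl⟩ := hq
    simp only [pvKeyOf]
    nlinarith [hx.1, hx.2, hx'.1, hx'.2]

theorem pvCells_nodup (h w : Int) : (pvCells h w).Nodup :=
  (pvCells_pairwise h w).imp (fun hlt => by intro rfl; omega)

-- ---------- grids ----------
def pvShape (M : List (List Bool)) (tm : List (List Char)) : Prop :=
  M.length = tm.length ∧ ∀ i : Nat, (M[i]?.map List.length) = (tm[i]?.map List.length)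

def pvRget (R : List (List Bool)) (q : Int × Int) : Bool :=
  PySem.List.pyGetD (PySem.List.pyGetD R q.2 []) q.1 false

def pvOutEq (h w : Int) (M R : List (List Bool)) : Prop :=
  ∀ i j : Nat, ¬ pvInRange h w (((j : Nat) : Int), ((i : Nat) : Int)) →
    (M[i]?.bind (·[j]?)) = (R[i]?.bind (·[j]?))

theorem pvRget_nonneg (R : List (List Bool)) (x y : Int) (hx : 0 ≤ x) (hy : 0 ≤ y) :
    pvRget R (x, y) = (R.getD y.toNat []).getD x.toNat false := by
  simp only [pvRget, PySem.List.pyGetD_of_nonneg _ _ hy, PySem.List.pyGetD_of_nonneg _ _ hx]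

theorem pvSet2_nonneg (M : List (List Bool)) (x y : Int) (v : Bool) (hx : 0 ≤ x) (hy : 0 ≤ y) :
    pvSet2 M y x v = M.set y.toNat ((M.getD y.toNat []).set x.toNat v) := by
  simp only [pvSet2, PySem.List.pySetD_of_nonneg _ _ hy, PySem.List.pySetD_of_nonneg _ _ hx,
    PySem.List.pyGetD_of_nonneg _ _ hy]

theorem pvList_set_self {α : Type} (xs : List α) (n : Nat) (v : α) (h : xs[n]? = some v) :
    xs.set n v = xs := by
  obtain ⟨hn, hv⟩ := List.getElem?_eq_some_iff.1 h
  apply List.ext_getElem?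
  intro m
  rw [List.getElem?_set]
  split
  · next heq => subst heq; simp [hn, hv]
  · rfl

theorem pvShape_set2 (M : List (List Bool)) (tm : List (List Char)) (x y : Int) (v : Bool)
    (hx : 0 ≤ x) (hy : 0 ≤ y) (hs : pvShape M tm) : pvShape (pvSet2 M y x v) tm := by
  rw [pvSet2_nonneg M x y v hx hy]
  refine ⟨by simp [hs.1], ?_⟩
  intro i
  rw [List.getElem?_set]
  split
  · next heq =>
    subst heq
    by_cases hlen : y.toNat < M.length
    · have hrow : M.getD y.toNat [] = M[y.toNat] := by
        simp [List.getD_eq_getElem?_getD, List.getElem?_eq_getElem hlen]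
      have h2 := hs.2 y.toNat
      simp only [List.getElem?_eq_getElem hlen, Option.map_some] at h2
      simp only [if_pos hlen, Option.map_some, List.length_set, hrow, h2]
    · have hnone : M[y.toNat]? = none := List.getElem?_eq_none_iff.2 (by omega)
      have h2 := hs.2 y.toNat
      simp only [hnone, Option.map_none] at h2
      simp [hlen, h2.symm]
  · exact hs.2 i

theorem pvIsIn_singleton (c : Char) (l : List Char) : PySem.Chars.isIn [c] l = true ↔ c ∈ l := by
  rw [PySem.Chars.isIn_iff_infix]
  constructor
  · intro h; exact h.subset (List.mem_singleton_self c)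
  · intro h
    obtain ⟨l₁, l₂, rfl⟩ := List.append_of_mem h
    exact ⟨l₁, l₂, by simp⟩

theorem pvSpace_char (c : Char) (h : PySem.Chars.isIn [c] pvSpaceTiles = true) : c ≠ '?' := by
  have := (pvIsIn_singleton c pvSpaceTiles).1 h
  simp only [pvSpaceTiles, List.mem_cons, List.not_mem_nil, or_false] at this
  rcases this with rfl | rfl <;> decide

theorem pvTile_valid (tm : List (List Char)) (y x : Int) (hx : 0 ≤ x) (hy : 0 ≤ y)
    (hne : pvTileAt tm y x ≠ '?') :
    ∃ hrow : y.toNat < tm.length,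
      x.toNat < tm[y.toNat].length ∧ tm[y.toNat][x.toNat]? = some (pvTileAt tm y x) := by
  have hrw : pvTileAt tm y x = (tm.getD y.toNat []).getD x.toNat '?' := by
    simp only [pvTileAt, PySem.List.pyGetD_of_nonneg _ _ hy, PySem.List.pyGetD_of_nonneg _ _ hx]
  by_cases hylen : y.toNat < tm.length
  · have hrow : tm.getD y.toNat [] = tm[y.toNat] := by
      simp [List.getD_eq_getElem?_getD, List.getElem?_eq_getElem hylen]
    by_cases hxlen : x.toNat < tm[y.toNat].length
    · exact ⟨hylen, hxlen, by
        rw [List.getElem?_eq_getElem hxlen]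
        congr 1
        rw [hrw, hrow, List.getD_eq_getElem?_getD, List.getElem?_eq_getElem hxlen,
          Option.getD_some]⟩
    · exfalso; apply hne
      rw [hrw, hrow, List.getD_eq_getElem?_getD, List.getElem?_eq_none_iff.2 (by omega)]
      rfl
  · exfalso; apply hne
    rw [hrw, List.getD_eq_getElem?_getD (l := tm), List.getElem?_eq_none_iff.2 (by omega)]
    rfl

theorem pvRget_set2_self (M : List (List Bool)) (x y : Int) (v : Bool) (hx : 0 ≤ x) (hy : 0 ≤ y)
    (hylen : y.toNat < M.length) (hxlen : x.toNat < (M.getD y.toNat []).length) :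
    pvRget (pvSet2 M y x v) (x, y) = v := by
  rw [pvSet2_nonneg M x y v hx hy, pvRget_nonneg _ x y hx hy]
  have h1 : (M.set y.toNat ((M.getD y.toNat []).set x.toNat v)).getD y.toNat []
      = (M.getD y.toNat []).set x.toNat v := by
    rw [List.getD_eq_getElem?_getD, List.getElem?_set_self (by simpa using hylen)]
    rfl
  rw [h1, List.getD_eq_getElem?_getD, List.getElem?_set_self (by simpa using hxlen)]
  rfl

theorem pvRget_set2_other (M : List (List Bool)) (x y : Int) (v : Bool) (q : Int × Int)
    (hx : 0 ≤ x) (hy : 0 ≤ y) (hqx : 0 ≤ q.1) (hqy : 0 ≤ q.2) (hne : q ≠ (x, y)) :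
    pvRget (pvSet2 M y x v) q = pvRget M q := by
  obtain ⟨qx, qy⟩ := q
  rw [Ne, Prod.mk.injEq, not_and_or] at hne
  rw [pvSet2_nonneg M x y v hx hy, pvRget_nonneg _ qx qy hqx hqy, pvRget_nonneg M qx qy hqx hqy]
  by_cases hrow : qy.toNat = y.toNat
  · have heq : qy = y := by omega
    subst heq
    have hx' : qx ≠ x := by tauto
    have hxn : qx.toNat ≠ x.toNat := by omega
    rw [List.getD_eq_getElem?_getD (l := M.set qy.toNat _), List.getElem?_set_self']
    by_cases hylen : qy.toNat < M.length
    · rw [List.getElem?_eq_getElem hylen]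
      change ((M.getD qy.toNat []).set x.toNat v).getD qx.toNat false = _
      rw [List.getD_eq_getElem?_getD, List.getElem?_set_ne (by omega),
        ← List.getD_eq_getElem?_getD, List.getD_eq_getElem?_getD (l := M),
        List.getElem?_eq_getElem hylen]
    · rw [List.getElem?_eq_none_iff.2 (by omega)]
      change ([] : List Bool).getD qx.toNat false = _
      rw [List.getD_eq_getElem?_getD (l := M), List.getElem?_eq_none_iff.2 (by omega)]
      rfl
  · rw [List.getD_eq_getElem?_getD (l := M.set y.toNat _), List.getElem?_set_ne (by omega),
      ← List.getD_eq_getElem?_getD]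

theorem pvSet2_noop (M : List (List Bool)) (x y : Int) (hx : 0 ≤ x) (hy : 0 ≤ y)
    (h : pvRget M (x, y) = true) : pvSet2 M y x true = M := by
  rw [pvRget_nonneg M x y hx hy] at h
  by_cases hylen : y.toNat < M.length
  · have hrow : M.getD y.toNat [] = M[y.toNat] := by
      simp [List.getD_eq_getElem?_getD, List.getElem?_eq_getElem hylen]
    rw [hrow] at h
    by_cases hxlen : x.toNat < M[y.toNat].length
    · rw [pvSet2_nonneg M x y true hx hy, hrow]
      have hset : M[y.toNat].set x.toNat true = M[y.toNat] := by
        apply pvList_set_self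
        rw [List.getElem?_eq_getElem hxlen]
        rw [List.getD_eq_getElem?_getD, List.getElem?_eq_getElem hxlen] at h
        simpa using h
      rw [hset]
      exact pvList_set_self M y.toNat _ (by rw [List.getElem?_eq_getElem hylen])
    · exfalso
      rw [List.getD_eq_getElem?_getD, List.getElem?_eq_none_iff.2 (by omega)] at h
      simp at h
  · exfalso
    rw [List.getD_eq_getElem?_getD (l := M), List.getElem?_eq_none_iff.2 (by omega)] at h
    simp at h

theorem pvSet2_getElem?_other (M : List (List Bool)) (x y : Int) (v : Bool) (i j : Nat)
    (hx : 0 ≤ x) (hy : 0 ≤ y) (hne : ¬(i = y.toNat ∧ j = x.toNat)) :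
    ((pvSet2 M y x v)[i]?.bind (·[j]?)) = (M[i]?.bind (·[j]?)) := by
  rw [pvSet2_nonneg M x y v hx hy]
  by_cases hi : i = y.toNat
  · subst hi
    have hj : j ≠ x.toNat := fun hj => hne ⟨rfl, hj⟩
    rw [List.getElem?_set_self']
    by_cases hylen : y.toNat < M.length
    · rw [List.getElem?_eq_getElem hylen]
      change ((M.getD y.toNat []).set x.toNat v)[j]? = M[y.toNat][j]?
      have hrow : M.getD y.toNat [] = M[y.toNat] := by
        simp [List.getD_eq_getElem?_getD, List.getElem?_eq_getElem hylen]
      rw [hrow, List.getElem?_set_ne (by omega)]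
    · rw [List.getElem?_eq_none_iff.2 (by omega)]
      rfl
  · rw [List.getElem?_set_ne (by omega)]

-- ---------- per-direction decomposition of the two cell bodies ----------
def pvNeighs (p : Int × Int) : List (Int × Int) :=
  [(p.1, p.2 - 1), (p.1, p.2 + 1), (p.1 - 1, p.2), (p.1 + 1, p.2)]

def pvSp (c : Char) : Prop := PySem.Chars.isIn [c] pvSpaceTiles = true
def pvLm (c : Char) : Prop := PySem.Chars.isIn [c] (pvKeyTiles ++ pvDoorTiles) = true

def pvEStep (tm : List (List Char)) (h w : Int) (tile : Char) (steps : Int)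
    (E : PySem.Dict String Int) (q : Int × Int) : PySem.Dict String Int :=
  if pvGuard h w q then pvExitAddB tile steps E (pvTileAt tm q.2 q.1) else E

def pvMStep (tm : List (List Char)) (h w : Int) (M : List (List Bool)) (q : Int × Int) :
    List (List Bool) :=
  if pvGuard h w q && PySem.Chars.isIn [pvTileAt tm q.2 q.1] pvSpaceTiles then
    pvSet2 M q.2 q.1 true
  else M

def pvPairStep (tm : List (List Char)) (h w : Int) (tile : Char) (steps : Int)
    (st : List (List Bool) × PySem.Dict String Int) (q : Int × Int) :
    List (List Bool) × PySem.Dict String Int :=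
  (pvMStep tm h w st.1 q, pvEStep tm h w tile steps st.2 q)

def pvBStep (tm : List (List Char)) (h w : Int) (tile : Char) (steps : Int)
    (st : PySem.Set (Int × Int) × List (Int × Int) × PySem.Dict String Int) (q : Int × Int) :
    PySem.Set (Int × Int) × List (Int × Int) × PySem.Dict String Int :=
  if pvGuard h w q then
    let c := pvTileAt tm q.2 q.1
    let E := pvExitAddB tile steps st.2.2 c
    if PySem.Chars.isIn [c] pvSpaceTiles && !(st.1.contains q) then
      (PySem.Set.add st.1 q, st.2.1 ++ [q], E)
    else (st.1, st.2.1, E)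
  else st

theorem pvCellB_eq (tm : List (List Char)) (h w : Int) (tile : Char) (steps : Int)
    (st : PySem.Set (Int × Int) × List (Int × Int) × PySem.Dict String Int) (p : Int × Int) :
    pvCellB tm h w tile steps st p = (pvNeighs p).foldl (pvBStep tm h w tile steps) st := rfl

theorem pvBeq_singleton (c d : Char) : (([c] : List Char) == [d]) = (c == d) := by
  by_cases h : c = d <;> simp [h]

theorem pvExitAddA_sent (tile : Char) (steps : Int) (E : PySem.Dict String Int) :
    pvExitAddA tile steps E ['?','?'] = E := by
  have : PySem.Chars.isIn ['?','?'] (pvKeyTiles ++ pvDoorTiles) = false := by decide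
  simp [pvExitAddA, this]

theorem pvExitAddA_single (tile : Char) (steps : Int) (E : PySem.Dict String Int) (c : Char) :
    pvExitAddA tile steps E [c] = pvExitAddB tile steps E c := by
  simp only [pvExitAddA, pvExitAddB, pvBeq_singleton]

theorem pvSentSpace : PySem.Chars.isIn ['?','?'] pvSpaceTiles = false := by decide

theorem pvBodyA_eq (tm : List (List Char)) (h w : Int) (tile : Char) (steps : Int)
    (st : List (List Bool) × PySem.Dict String Int) (p : Int × Int)
    (hp : pvInRange h w p) :
    pvCellA tm h w tile steps st p = (pvNeighs p).foldl (pvPairStep tm h w tile steps) st := by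
  obtain ⟨x, y⟩ := p
  obtain ⟨hx0, hxw, hy0, hyh⟩ := hp
  simp only at hx0 hxw hy0 hyh
  have guardAux : ∀ (q : Int × Int) (P : Prop) [Decidable P], (pvInRange h w q ↔ P) →
      pvGuard h w q = decide P := by
    intro q P _ hiff
    by_cases hP : P
    · rw [decide_eq_true hP]
      simp only [pvGuard, Bool.and_eq_true, decide_eq_true_eq]
      have := hiff.2 hP
      simp only [pvInRange] at this
      tauto
    · rw [decide_eq_false hP]
      simp only [pvGuard, Bool.and_eq_false_iff, decide_eq_false_iff_not]
      by_contra hcon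
      simp only [not_or, not_not] at hcon
      exact hP (hiff.1 ⟨hcon.1.1.1, hcon.1.1.2, hcon.1.2, hcon.2⟩)
  have gN : pvGuard h w (x, y - 1) = decide (y - 1 ≥ 0) := by
    apply guardAux; simp only [pvInRange]; omega
  have gS : pvGuard h w (x, y + 1) = decide (y + 1 < h) := by
    apply guardAux; simp only [pvInRange]; omega
  have gW : pvGuard h w (x - 1, y) = decide (x - 1 ≥ 0) := by
    apply guardAux; simp only [pvInRange]; omega
  have gE : pvGuard h w (x + 1, y) = decide (x + 1 < w) := by
    apply guardAux; simp only [pvInRange]; omega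
  simp only [pvNeighs, List.foldl_cons, List.foldl_nil, pvPairStep, pvEStep, pvMStep,
    gN, gS, gW, gE]
  simp only [pvCellA, List.foldl_cons, List.foldl_nil]
  by_cases hN : (1:Int) ≤ y <;> by_cases hS : y + 1 < h <;>
    by_cases hW : (1:Int) ≤ x <;> by_cases hE : x + 1 < w <;>
    simp [hN, hS, hW, hE, pvExitAddA_sent, pvExitAddA_single, pvSentSpace]

-- ---------- the two relations ----------
def pvClosed (tm : List (List Char)) (h w : Int) (tile : Char) (E : PySem.Dict String Int)
    (V : List (Int × Int)) (p : Int × Int) : Prop :=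
  ∀ q ∈ pvNeighs p, pvInRange h w q →
    (pvSp (pvTileAt tm q.2 q.1) → q ∈ V) ∧
    (pvLm (pvTileAt tm q.2 q.1) → pvTileAt tm q.2 q.1 ≠ tile →
      E.contains (String.ofList [pvTileAt tm q.2 q.1]) = true)

def pvInv (tm : List (List Char)) (h w : Int) (tile : Char) (R : List (List Bool))
    (V F : List (Int × Int)) (E : PySem.Dict String Int) : Prop :=
  pvShape R tm ∧
  (∀ q ∈ V, pvInRange h w q) ∧
  (∀ q, pvInRange h w q → (pvRget R q = true ↔ q ∈ V)) ∧
  V.Nodup ∧ F.Nodup ∧ (∀ q ∈ F, q ∈ V) ∧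
  F.Pairwise (fun a b => pvKeyOf w a < pvKeyOf w b) ∧
  (∀ p ∈ V, p ∉ F → pvClosed tm h w tile E V p)

def pvLRel (tm : List (List Char)) (h w : Int) (V : List (Int × Int)) (R : List (List Bool))
    (E0 : PySem.Dict String Int) (st : List (List Bool) × PySem.Dict String Int)
    (stB : PySem.Set (Int × Int) × List (Int × Int) × PySem.Dict String Int) : Prop :=
  st.2 = stB.2.2 ∧
  stB.1 = V ++ stB.2.1 ∧
  (∀ q ∈ stB.2.1, pvInRange h w q ∧ pvSp (pvTileAt tm q.2 q.1) ∧ q ∉ V) ∧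
  stB.2.1.Nodup ∧
  pvShape st.1 tm ∧
  (∀ q, pvInRange h w q → (pvRget st.1 q = true ↔ (q ∈ V ∨ q ∈ stB.2.1))) ∧
  pvOutEq h w st.1 R ∧
  (∀ s, E0.contains s = true → st.2.contains s = true)

theorem pvExitAddB_mono (tile : Char) (steps : Int) (E : PySem.Dict String Int) (c : Char)
    (s : String) (h : E.contains s = true) : (pvExitAddB tile steps E c).contains s = true := by
  unfold pvExitAddB
  split
  · rw [PySem.Dict.contains_insert]; simp [h]
  · exact h

theorem pvShape_row_len (M : List (List Bool)) (tm : List (List Char)) (hs : pvShape M tm)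
    (i : Nat) (hi : i < tm.length) :
    i < M.length ∧ (M.getD i []).length = (tm.getD i []).length := by
  have hlen : i < M.length := by rw [hs.1]; exact hi
  refine ⟨hlen, ?_⟩
  have h2 := hs.2 i
  simp only [List.getElem?_eq_getElem hlen, List.getElem?_eq_getElem hi,
    Option.map_some, Option.some.injEq] at h2
  rw [List.getD_eq_getElem?_getD, List.getElem?_eq_getElem hlen,
    List.getD_eq_getElem?_getD (l := tm), List.getElem?_eq_getElem hi]
  exact h2

theorem pvDirSim (tm : List (List Char)) (h w : Int) (tile : Char) (steps : Int)
    (V : List (Int × Int)) (R : List (List Bool)) (E0 : PySem.Dict String Int)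
    (st : List (List Bool) × PySem.Dict String Int)
    (stB : PySem.Set (Int × Int) × List (Int × Int) × PySem.Dict String Int)
    (q : Int × Int) (hrel : pvLRel tm h w V R E0 st stB) :
    pvLRel tm h w V R E0 (pvPairStep tm h w tile steps st q)
      (pvBStep tm h w tile steps stB q) := by
  obtain ⟨qx, qy⟩ := q
  obtain ⟨M, E⟩ := st
  obtain ⟨Vb, d, Eb⟩ := stB
  obtain ⟨hE, hV, hdisc, hnd, hshape, hm1, hout, hmono⟩ := hrel
  simp only at hE hV hdisc hnd hshape hm1 hout hmono
  by_cases hg : pvGuard h w (qx, qy) = true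
  · have hq : pvInRange h w (qx, qy) := (pvGuard_iff h w _).1 hg
    obtain ⟨hqx, hqxw, hqy, hqyh⟩ := hq
    simp only at hqx hqxw hqy hqyh
    have hE' : pvExitAddB tile steps E (pvTileAt tm qy qx)
        = pvExitAddB tile steps Eb (pvTileAt tm qy qx) := by rw [hE]
    have hmono' : ∀ s, E0.contains s = true →
        (pvExitAddB tile steps E (pvTileAt tm qy qx)).contains s = true :=
      fun s hs => pvExitAddB_mono _ _ _ _ _ (hmono s hs)
    by_cases hsp : PySem.Chars.isIn [pvTileAt tm qy qx] pvSpaceTiles = true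
    · by_cases hvq : Vb.contains (qx, qy) = true
      · have hqmem : (qx, qy) ∈ V ∨ (qx, qy) ∈ d := by
          have hmem := List.contains_iff_mem.1 hvq
          rw [hV] at hmem
          exact List.mem_append.1 hmem
        have hnoop : pvSet2 M qy qx true = M :=
          pvSet2_noop M qx qy hqx hqy ((hm1 (qx, qy) ⟨hqx, hqxw, hqy, hqyh⟩).2 hqmem)
        have hA : pvPairStep tm h w tile steps (M, E) (qx, qy)
            = (M, pvExitAddB tile steps E (pvTileAt tm qy qx)) := by
          simp only [pvPairStep, pvMStep, pvEStep, hg, hsp, Bool.and_self, if_pos, hnoop]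
        have hB : pvBStep tm h w tile steps (Vb, d, Eb) (qx, qy)
            = (Vb, d, pvExitAddB tile steps Eb (pvTileAt tm qy qx)) := by
          simp only [pvBStep, hg, if_pos, hsp, hvq]
          simp
        rw [hA, hB]
        exact ⟨by simpa using hE', hV, hdisc, hnd, hshape, hm1, hout, hmono'⟩
      · -- newly discovered cell
        have hvq' : Vb.contains (qx, qy) = false := by simpa using hvq
        have hnmem : (qx, qy) ∉ Vb := fun hmem => by
          have hc : Vb.contains (qx, qy) = true := by
            show List.contains Vb (qx, qy) = true
            exact List.contains_iff_mem.2 hmem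
          rw [hc] at hvq'; cases hvq'
        have hnV : (qx, qy) ∉ V := fun hmem => hnmem (by rw [hV]; exact List.mem_append_left _ hmem)
        have hnd' : (qx, qy) ∉ d := fun hmem => hnmem (by rw [hV]; exact List.mem_append_right _ hmem)
        have hne : pvTileAt tm qy qx ≠ '?' := pvSpace_char _ hsp
        obtain ⟨hylen, hxlen, _⟩ := pvTile_valid tm qy qx hqx hqy hne
        have hrow := pvShape_row_len M tm hshape qy.toNat hylen
        have htmrow : tm.getD qy.toNat [] = tm[qy.toNat] := by
          simp [List.getD_eq_getElem?_getD, List.getElem?_eq_getElem hylen]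
        have hxlen' : qx.toNat < (M.getD qy.toNat []).length := by
          rw [hrow.2, htmrow]; exact hxlen
        have hA : pvPairStep tm h w tile steps (M, E) (qx, qy)
            = (pvSet2 M qy qx true, pvExitAddB tile steps E (pvTileAt tm qy qx)) := by
          simp only [pvPairStep, pvMStep, pvEStep, hg, hsp, Bool.and_self, if_pos]
        have hB : pvBStep tm h w tile steps (Vb, d, Eb) (qx, qy)
            = (Vb ++ [(qx, qy)], d ++ [(qx, qy)], pvExitAddB tile steps Eb (pvTileAt tm qy qx)) := by
          simp only [pvBStep, hg, if_pos, hsp, hvq']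
          simp only [PySem.Set.add, hvq']
          simp
        rw [hA, hB]
        refine ⟨by simpa using hE', ?_, ?_, ?_, ?_, ?_, ?_, hmono'⟩
        · show Vb ++ [(qx, qy)] = V ++ (d ++ [(qx, qy)])
          rw [hV, List.append_assoc]
        · intro r hr
          rcases List.mem_append.1 hr with hr' | hr'
          · exact hdisc r hr'
          · rw [List.mem_singleton.1 hr']
            exact ⟨⟨hqx, hqxw, hqy, hqyh⟩, hsp, hnV⟩
        · exact List.Nodup.append hnd (List.nodup_singleton _)
            (by intro a ha hb; rw [List.mem_singleton.1 hb] at ha; exact hnd' ha)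
        · exact pvShape_set2 M tm qx qy true hqx hqy hshape
        · intro r hrin
          by_cases hrq : r = (qx, qy)
          · subst hrq
            rw [pvRget_set2_self M qx qy true hqx hqy hrow.1 hxlen']
            simp
          · rw [pvRget_set2_other M qx qy true r hqx hqy hrin.1 hrin.2.2.1 hrq]
            rw [hm1 r hrin]
            constructor
            · rintro (h1 | h1)
              · exact Or.inl h1
              · exact Or.inr (List.mem_append_left _ h1)
            · rintro (h1 | h1)
              · exact Or.inl h1
              · rcases List.mem_append.1 h1 with h2 | h2
                · exact Or.inr h2
                · exact absurd (List.mem_singleton.1 h2) hrq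
        · intro i j hnot
          rw [pvSet2_getElem?_other M qx qy true i j hqx hqy ?_]
          · exact hout i j hnot
          · rintro ⟨hi, hj⟩
            apply hnot
            have hxe : ((j : Nat) : Int) = qx := by omega
            have hye : ((i : Nat) : Int) = qy := by omega
            rw [hxe, hye]
            exact ⟨hqx, hqxw, hqy, hqyh⟩
    · -- not a space tile: reachability side unchanged
      have hsp' : PySem.Chars.isIn [pvTileAt tm qy qx] pvSpaceTiles = false := by simpa using hsp
      have hA : pvPairStep tm h w tile steps (M, E) (qx, qy)
          = (M, pvExitAddB tile steps E (pvTileAt tm qy qx)) := by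
        simp only [pvPairStep, pvMStep, pvEStep, hg, hsp', Bool.and_false, if_pos]
        simp
      have hB : pvBStep tm h w tile steps (Vb, d, Eb) (qx, qy)
          = (Vb, d, pvExitAddB tile steps Eb (pvTileAt tm qy qx)) := by
        simp only [pvBStep, hg, if_pos, hsp']
        simp
      rw [hA, hB]
      exact ⟨by simpa using hE', hV, hdisc, hnd, hshape, hm1, hout, hmono'⟩
  · have hg' : pvGuard h w (qx, qy) = false := by simpa using hg
    have hA : pvPairStep tm h w tile steps (M, E) (qx, qy) = (M, E) := by
      simp only [pvPairStep, pvMStep, pvEStep, hg', Bool.false_and]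
      simp
    have hB : pvBStep tm h w tile steps (Vb, d, Eb) (qx, qy) = (Vb, d, Eb) := by
      simp only [pvBStep, hg']
      simp
    rw [hA, hB]
    exact ⟨hE, hV, hdisc, hnd, hshape, hm1, hout, hmono⟩

theorem pvCellSim (tm : List (List Char)) (h w : Int) (tile : Char) (steps : Int)
    (V : List (Int × Int)) (R : List (List Bool)) (E0 : PySem.Dict String Int)
    (st : List (List Bool) × PySem.Dict String Int)
    (stB : PySem.Set (Int × Int) × List (Int × Int) × PySem.Dict String Int)
    (p : Int × Int) (hp : pvInRange h w p) (hrel : pvLRel tm h w V R E0 st stB) :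
    pvLRel tm h w V R E0 (pvCellA tm h w tile steps st p) (pvCellB tm h w tile steps stB p) := by
  rw [pvBodyA_eq tm h w tile steps st p hp, pvCellB_eq]
  exact pvFoldlRel _ _ _ (pvNeighs p) st stB
    (fun s t a _ hr => pvDirSim tm h w tile steps V R E0 s t a hr) hrel

theorem pvCellNoop (tm : List (List Char)) (h w : Int) (tile : Char) (steps : Int)
    (V : List (Int × Int)) (R : List (List Bool)) (E0 : PySem.Dict String Int)
    (st : List (List Bool) × PySem.Dict String Int)
    (stB : PySem.Set (Int × Int) × List (Int × Int) × PySem.Dict String Int)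
    (p : Int × Int) (hp : pvInRange h w p) (hcl : pvClosed tm h w tile E0 V p)
    (hrel : pvLRel tm h w V R E0 st stB) :
    pvCellA tm h w tile steps st p = st := by
  rw [pvBodyA_eq tm h w tile steps st p hp]
  apply pvFoldlFixed
  intro q hq
  show (pvMStep tm h w st.1 q, pvEStep tm h w tile steps st.2 q) = st
  by_cases hg : pvGuard h w q = true
  · have hqin := (pvGuard_iff h w q).1 hg
    obtain ⟨hsp_cl, hlm_cl⟩ := hcl q hq hqin
    have hM : pvMStep tm h w st.1 q = st.1 := by
      by_cases hsp : PySem.Chars.isIn [pvTileAt tm q.2 q.1] pvSpaceTiles = true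
      · simp only [pvMStep, hg, hsp, Bool.and_self, if_pos]
        have hqV : q ∈ V := hsp_cl hsp
        have hR : pvRget st.1 q = true := (hrel.2.2.2.2.2.1 q hqin).2 (Or.inl hqV)
        have := pvSet2_noop st.1 q.1 q.2 hqin.1 hqin.2.2.1 (by
          have : (q.1, q.2) = q := rfl
          rw [this]; exact hR)
        exact this
      · simp only [pvMStep, hg, Bool.true_and]
        rw [if_neg (by simpa using hsp)]
    have hEeq : pvEStep tm h w tile steps st.2 q = st.2 := by
      simp only [pvEStep, hg, if_pos, pvExitAddB]
      split
      · next hcond =>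
        exfalso
        rw [Bool.and_eq_true, Bool.and_eq_true] at hcond
        have hlm : pvLm (pvTileAt tm q.2 q.1) := hcond.1.1
        have hnc : st.2.contains (String.ofList [pvTileAt tm q.2 q.1]) = false := by
          simpa using hcond.1.2
        have hnt : pvTileAt tm q.2 q.1 ≠ tile := by
          simpa using hcond.2
        have := hrel.2.2.2.2.2.2.2 _ (hlm_cl hlm hnt)
        rw [this] at hnc
        cases hnc
      · rfl
    rw [hM, hEeq]
  · have hg' : pvGuard h w q = false := by simpa using hg
    simp only [pvMStep, pvEStep, hg', Bool.false_and]
    simp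

theorem pvLayerSim (tm : List (List Char)) (h w : Int) (tile : Char) (steps : Int)
    (V F : List (Int × Int)) (R : List (List Bool)) (E0 : PySem.Dict String Int)
    (hVin : ∀ q ∈ V, pvInRange h w q)
    (hcl : ∀ p ∈ V, p ∉ F → pvClosed tm h w tile E0 V p) :
    ∀ (l : List (Int × Int)) (st : List (List Bool) × PySem.Dict String Int)
      (stB : PySem.Set (Int × Int) × List (Int × Int) × PySem.Dict String Int),
      (∀ p ∈ l, p ∈ V) → pvLRel tm h w V R E0 st stB →
      pvLRel tm h w V R E0 (l.foldl (pvCellA tm h w tile steps) st)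
        ((l.filter (fun p => F.contains p)).foldl (pvCellB tm h w tile steps) stB)
  | [], _, _, _, hrel => hrel
  | p :: l, st, stB, hl, hrel => by
    have hpV := hl p List.mem_cons_self
    by_cases hc : F.contains p = true
    · rw [List.filter_cons_of_pos hc]
      simp only [List.foldl_cons]
      exact pvLayerSim tm h w tile steps V F R E0 hVin hcl l _ _
        (fun b hb => hl b (List.mem_cons_of_mem _ hb))
        (pvCellSim tm h w tile steps V R E0 st stB p (hVin p hpV) hrel)
    · have hcF : p ∉ F := fun hm => hc (List.contains_iff_mem.2 hm)
      rw [List.filter_cons_of_neg (by simpa using hc)]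
      simp only [List.foldl_cons,
        pvCellNoop tm h w tile steps V R E0 st stB p (hVin p hpV) (hcl p hpV hcF) hrel]
      exact pvLayerSim tm h w tile steps V F R E0 hVin hcl l _ _
        (fun b hb => hl b (List.mem_cons_of_mem _ hb)) hrel

-- ---------- what one B layer establishes for the processed cells ----------
def pvClosedMid (tm : List (List Char)) (h w : Int) (tile : Char) (p : Int × Int)
    (stB : PySem.Set (Int × Int) × List (Int × Int) × PySem.Dict String Int) : Prop :=
  ∀ q ∈ pvNeighs p, pvInRange h w q →
    (pvSp (pvTileAt tm q.2 q.1) → q ∈ stB.1) ∧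
    (pvLm (pvTileAt tm q.2 q.1) → pvTileAt tm q.2 q.1 ≠ tile →
      stB.2.2.contains (String.ofList [pvTileAt tm q.2 q.1]) = true)

theorem pvBStepMono (tm : List (List Char)) (h w : Int) (tile : Char) (steps : Int)
    (stB : PySem.Set (Int × Int) × List (Int × Int) × PySem.Dict String Int) (r : Int × Int) :
    (∀ a, a ∈ stB.1 → a ∈ (pvBStep tm h w tile steps stB r).1) ∧
    (∀ s, stB.2.2.contains s = true →
      (pvBStep tm h w tile steps stB r).2.2.contains s = true) := by
  by_cases hg : pvGuard h w r = true
  · by_cases hcond : (PySem.Chars.isIn [pvTileAt tm r.2 r.1] pvSpaceTiles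
        && !(stB.1.contains r)) = true
    · have hB : pvBStep tm h w tile steps stB r
          = (PySem.Set.add stB.1 r, stB.2.1 ++ [r],
             pvExitAddB tile steps stB.2.2 (pvTileAt tm r.2 r.1)) := by
        simp only [pvBStep, hg, if_pos, hcond]
      rw [hB]
      refine ⟨?_, ?_⟩
      · intro a ha
        show a ∈ PySem.Set.add stB.1 r
        unfold PySem.Set.add
        split
        · exact ha
        · exact List.mem_append_left _ ha
      · intro s hs
        exact pvExitAddB_mono _ _ _ _ _ hs
    · have hB : pvBStep tm h w tile steps stB r
          = (stB.1, stB.2.1, pvExitAddB tile steps stB.2.2 (pvTileAt tm r.2 r.1)) := by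
        simp only [pvBStep, hg, if_pos]
        rw [if_neg hcond]
      rw [hB]
      exact ⟨fun a ha => ha, fun s hs => pvExitAddB_mono _ _ _ _ _ hs⟩
  · have hB : pvBStep tm h w tile steps stB r = stB := by
      simp only [pvBStep]
      rw [if_neg hg]
    rw [hB]
    exact ⟨fun a ha => ha, fun s hs => hs⟩

theorem pvCellBMono (tm : List (List Char)) (h w : Int) (tile : Char) (steps : Int)
    (stB : PySem.Set (Int × Int) × List (Int × Int) × PySem.Dict String Int) (p : Int × Int) :
    (∀ a, a ∈ stB.1 → a ∈ (pvCellB tm h w tile steps stB p).1) ∧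
    (∀ s, stB.2.2.contains s = true →
      (pvCellB tm h w tile steps stB p).2.2.contains s = true) := by
  rw [pvCellB_eq]
  have := pvFoldlPers (pvBStep tm h w tile steps)
    (fun st => (∀ a, a ∈ stB.1 → a ∈ st.1) ∧
      (∀ s, stB.2.2.contains s = true → st.2.2.contains s = true))
    (fun st r hst => ⟨fun a ha => (pvBStepMono tm h w tile steps st r).1 a (hst.1 a ha),
      fun s hs => (pvBStepMono tm h w tile steps st r).2 s (hst.2 s hs)⟩)
    (pvNeighs p) stB ⟨fun a ha => ha, fun s hs => hs⟩
  exact this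

theorem pvBStepEstab (tm : List (List Char)) (h w : Int) (tile : Char) (steps : Int)
    (stB : PySem.Set (Int × Int) × List (Int × Int) × PySem.Dict String Int) (r : Int × Int)
    (hin : pvInRange h w r) :
    (pvSp (pvTileAt tm r.2 r.1) → r ∈ (pvBStep tm h w tile steps stB r).1) ∧
    (pvLm (pvTileAt tm r.2 r.1) → pvTileAt tm r.2 r.1 ≠ tile →
      (pvBStep tm h w tile steps stB r).2.2.contains
        (String.ofList [pvTileAt tm r.2 r.1]) = true) := by
  have hg : pvGuard h w r = true := (pvGuard_iff h w r).2 hin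
  constructor
  · intro hsp
    simp only [pvBStep, hg, if_pos]
    by_cases hv : stB.1.contains r = true
    · have hcond : (PySem.Chars.isIn [pvTileAt tm r.2 r.1] pvSpaceTiles
          && !(stB.1.contains r)) = false := by
        rw [hv]; simp
      rw [if_neg (by rw [hcond]; simp)]
      show r ∈ stB.1
      exact List.contains_iff_mem.1 hv
    · have hv' : stB.1.contains r = false := by simpa using hv
      rw [if_pos (by rw [hsp, hv']; rfl)]
      show r ∈ PySem.Set.add stB.1 r
      unfold PySem.Set.add
      rw [if_neg (by rw [hv']; simp)]
      exact List.mem_append_right _ (List.mem_singleton_self _)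
  · intro hlm hnt
    have hE : (pvBStep tm h w tile steps stB r).2.2
        = pvExitAddB tile steps stB.2.2 (pvTileAt tm r.2 r.1) := by
      simp only [pvBStep, hg, if_pos]
      split <;> rfl
    rw [hE]
    unfold pvExitAddB
    split
    · rw [PySem.Dict.contains_insert]
      simp
    · next hcond =>
      have : ¬(pvLm (pvTileAt tm r.2 r.1) ∧
          stB.2.2.contains (String.ofList [pvTileAt tm r.2 r.1]) = false ∧
          pvTileAt tm r.2 r.1 ≠ tile) := by
        intro ⟨h1, h2, h3⟩
        apply hcond
        rw [Bool.and_eq_true, Bool.and_eq_true]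
        refine ⟨⟨h1, by rw [h2]; rfl⟩, by simpa using h3⟩
      rcases Bool.eq_false_or_eq_true (stB.2.2.contains (String.ofList [pvTileAt tm r.2 r.1]))
        with hc | hc
      · exact hc
      · exact absurd ⟨hlm, hc, hnt⟩ this

theorem pvLayerEstab (tm : List (List Char)) (h w : Int) (tile : Char) (steps : Int)
    (F : List (Int × Int))
    (stB : PySem.Set (Int × Int) × List (Int × Int) × PySem.Dict String Int) :
    ∀ p ∈ F, pvClosedMid tm h w tile p (F.foldl (pvCellB tm h w tile steps) stB) := by
  apply pvFoldlEstab (pvCellB tm h w tile steps) (pvClosedMid tm h w tile)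
  · intro st p
    intro q hq hqin
    rw [pvCellB_eq]
    have hEst : ∀ (l : List (Int × Int)) (st' : _), q ∈ l →
        (pvSp (pvTileAt tm q.2 q.1) → q ∈ (l.foldl (pvBStep tm h w tile steps) st').1) ∧
        (pvLm (pvTileAt tm q.2 q.1) → pvTileAt tm q.2 q.1 ≠ tile →
          (l.foldl (pvBStep tm h w tile steps) st').2.2.contains
            (String.ofList [pvTileAt tm q.2 q.1]) = true) := by
      intro l
      induction l with
      | nil => intro st' hmem; cases hmem
      | cons a l ih =>
        intro st' hmem
        rcases List.mem_cons.1 hmem with rfl | hmem'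
        · simp only [List.foldl_cons]
          have hbase := pvBStepEstab tm h w tile steps st' q hqin
          constructor
          · intro hsp
            exact pvFoldlPers (pvBStep tm h w tile steps) (fun st => q ∈ st.1)
              (fun st r hst => (pvBStepMono tm h w tile steps st r).1 q hst) l _
              (hbase.1 hsp)
          · intro hlm hnt
            exact pvFoldlPers (pvBStep tm h w tile steps)
              (fun st => st.2.2.contains (String.ofList [pvTileAt tm q.2 q.1]) = true)
              (fun st r hst => (pvBStepMono tm h w tile steps st r).2 _ hst) l _
              (hbase.2 hlm hnt)
        · simp only [List.foldl_cons]
          exact ih _ hmem'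
    exact hEst (pvNeighs p) st hq
  · intro st p r hr
    intro q hq hqin
    obtain ⟨h1, h2⟩ := hr q hq hqin
    exact ⟨fun hsp => (pvCellBMono tm h w tile steps st p).1 q (h1 hsp),
      fun hlm hnt => (pvCellBMono tm h w tile steps st p).2 _ (h2 hlm hnt)⟩

-- ---------- the A sweep as a fold over the cell list ----------
theorem pvSweepA_eq (tm : List (List Char)) (h w : Int) (tile : Char) (R : List (List Bool))
    (steps : Int) (E : PySem.Dict String Int) :
    pvSweepA tm h w tile R steps E
      = (pvCells h w).foldl
          (fun st p => if pvRget R p = true then pvCellA tm h w tile steps st p else st)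
          (R, E) := by
  simp only [pvSweepA, pvCells, List.foldl_flatMap, List.foldl_map]
  rfl

theorem pvFilter_cells_eq (h w : Int) (F : List (Int × Int)) (hnd : F.Nodup)
    (hpw : F.Pairwise (fun a b => pvKeyOf w a < pvKeyOf w b))
    (hsub : ∀ p ∈ F, pvInRange h w p) :
    (pvCells h w).filter (fun p => F.contains p) = F := by
  have hperm : F.Perm ((pvCells h w).filter (fun p => F.contains p)) := by
    rw [List.perm_ext_iff_of_nodup hnd ((pvCells_nodup h w).filter _)]
    intro a
    rw [List.mem_filter]
    constructor
    · intro ha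
      exact ⟨(pvMem_cells h w a).2 (hsub a ha), List.contains_iff_mem.2 ha⟩
    · intro ⟨_, hc⟩
      exact List.contains_iff_mem.1 hc
  have h1 := PySem.List.sorted_eq_of_perm_of_pairwise_lt
    ((pvCells h w).filter (fun p => F.contains p)) F (pvKeyOf w) hperm hpw
  have h2 := PySem.List.sorted_eq_of_perm_of_pairwise_lt
    ((pvCells h w).filter (fun p => F.contains p))
    ((pvCells h w).filter (fun p => F.contains p)) (pvKeyOf w)
    (List.Perm.refl _) ((pvCells_pairwise h w).filter _)
  rw [h1] at h2
  exact h2.symm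

-- ---------- deciding 'map unchanged' ----------
theorem pvEntry_some (M : List (List Bool)) (i j : Nat) (hi : i < M.length)
    (hj : j < M[i].length) :
    (M[i]?.bind (·[j]?)) = some (pvRget M (((j : Nat) : Int), ((i : Nat) : Int))) := by
  rw [pvRget_nonneg M _ _ (by omega) (by omega)]
  simp only [Int.toNat_natCast]
  rw [List.getElem?_eq_getElem hi]
  simp only [Option.bind_some]
  rw [List.getElem?_eq_getElem hj]
  have hrow : M.getD i [] = M[i] := by
    simp [List.getD_eq_getElem?_getD, List.getElem?_eq_getElem hi]
  rw [hrow, List.getD_eq_getElem?_getD, List.getElem?_eq_getElem hj, Option.getD_some]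

theorem pvGrid_ext (M R : List (List Bool)) (hlen : M.length = R.length)
    (hent : ∀ i j : Nat, (M[i]?.bind (·[j]?)) = (R[i]?.bind (·[j]?))) : M = R := by
  apply List.ext_getElem?
  intro i
  by_cases hi : i < M.length
  · have hi' : i < R.length := by omega
    rw [List.getElem?_eq_getElem hi, List.getElem?_eq_getElem hi']
    congr 1
    apply List.ext_getElem?
    intro j
    have h1 := hent i j
    rw [List.getElem?_eq_getElem hi, List.getElem?_eq_getElem hi'] at h1
    simpa using h1
  · rw [List.getElem?_eq_none_iff.2 (by omega), List.getElem?_eq_none_iff.2 (by omega)]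

theorem pvEntry_none (M : List (List Bool)) (i j : Nat)
    (hval : ¬(i < M.length ∧ j < (M.getD i []).length)) :
    (M[i]?.bind (·[j]?)) = none := by
  by_cases hi : i < M.length
  · have hj : ¬ j < (M.getD i []).length := fun hj => hval ⟨hi, hj⟩
    have hrow : M.getD i [] = M[i] := by
      simp [List.getD_eq_getElem?_getD, List.getElem?_eq_getElem hi]
    rw [List.getElem?_eq_getElem hi]
    simp only [Option.bind_some]
    rw [List.getElem?_eq_none_iff.2 (by rw [← hrow]; omega)]
  · rw [List.getElem?_eq_none_iff.2 (by omega)]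
    rfl

theorem pvMeqR (tm : List (List Char)) (h w : Int) (V : List (Int × Int))
    (R : List (List Bool)) (E0 : PySem.Dict String Int)
    (st : List (List Bool) × PySem.Dict String Int)
    (stB : PySem.Set (Int × Int) × List (Int × Int) × PySem.Dict String Int)
    (hrel : pvLRel tm h w V R E0 st stB) (hshapeR : pvShape R tm)
    (hb2 : ∀ q, pvInRange h w q → (pvRget R q = true ↔ q ∈ V)) :
    st.1 = R ↔ stB.2.1 = [] := by
  obtain ⟨M, E⟩ := st
  obtain ⟨Vb, d, Eb⟩ := stB
  obtain ⟨hE, hV, hdisc, hnd, hshape, hm1, hout, hmono⟩ := hrel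
  simp only at hE hV hdisc hnd hshape hm1 hout hmono ⊢
  constructor
  · intro hMR
    by_contra hdne
    obtain ⟨q, hq⟩ := List.exists_mem_of_ne_nil d hdne
    obtain ⟨hqin, hqsp, hqnV⟩ := hdisc q hq
    have h1 : pvRget M q = true := (hm1 q hqin).2 (Or.inr hq)
    have h2 : pvRget R q ≠ true := fun ht => hqnV ((hb2 q hqin).1 ht)
    rw [hMR] at h1
    exact h2 h1
  · intro hd
    subst hd
    apply pvGrid_ext M R (by rw [hshape.1, hshapeR.1])
    intro i j
    by_cases hin : pvInRange h w (((j : Nat) : Int), ((i : Nat) : Int))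
    · by_cases hval : i < M.length ∧ j < (M.getD i []).length
      · have hitm : i < tm.length := by rw [← hshape.1]; exact hval.1
        have hrowM := pvShape_row_len M tm hshape i hitm
        have hrowR := pvShape_row_len R tm hshapeR i hitm
        have hvalR : i < R.length ∧ j < (R.getD i []).length := by
          refine ⟨hrowR.1, ?_⟩
          rw [hrowR.2, ← hrowM.2]
          exact hval.2
        have hjM : j < M[i].length := by
          have : M.getD i [] = M[i] := by
            simp [List.getD_eq_getElem?_getD, List.getElem?_eq_getElem hval.1]
          rw [← this]; exact hval.2
        have hjR : j < R[i].length := by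
          have : R.getD i [] = R[i] := by
            simp [List.getD_eq_getElem?_getD, List.getElem?_eq_getElem hvalR.1]
          rw [← this]; exact hvalR.2
        rw [pvEntry_some M i j hval.1 hjM, pvEntry_some R i j hvalR.1 hjR]
        congr 1
        have hm1' := hm1 _ hin
        simp only [List.not_mem_nil, or_false] at hm1'
        rw [Bool.eq_iff_iff, hm1', hb2 _ hin]
      · have hvalR : ¬(i < R.length ∧ j < (R.getD i []).length) := by
          intro ⟨h1, h2⟩
          apply hval
          have hitm : i < tm.length := by rw [← hshapeR.1]; exact h1
          have hrowM := pvShape_row_len M tm hshape i hitm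
          have hrowR := pvShape_row_len R tm hshapeR i hitm
          refine ⟨hrowM.1, ?_⟩
          rw [hrowM.2, ← hrowR.2]
          exact h2
        rw [pvEntry_none M i j hval, pvEntry_none R i j hvalR]
    · exact hout i j hin

theorem pvLoopB_nilF (tm : List (List Char)) (h w : Int) (tile : Char) (f : Nat)
    (V : PySem.Set (Int × Int)) (steps : Int) (E : PySem.Dict String Int) :
    pvLoopB tm h w tile f V [] steps E = E := by
  cases f <;> simp [pvLoopB]

theorem pvLoopSim (tm : List (List Char)) (h w : Int) (tile : Char) :
    ∀ (f : Nat) (R : List (List Bool)) (V F : List (Int × Int)) (E : PySem.Dict String Int)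
      (steps : Int), pvInv tm h w tile R V F E →
      pvLoopA tm h w tile f R steps E = pvLoopB tm h w tile f V F steps E := by
  intro f
  induction f with
  | zero => intro R V F E steps _; rfl
  | succ f ih =>
    intro R V F E steps hinv
    obtain ⟨hshapeR, hb1, hb2, hVnd, hFnd, hFV, hFpw, hcl⟩ := hinv
    have hinit : pvLRel tm h w V R E (R, E) (V, [], E) := by
      refine ⟨rfl, by simp, by simp, List.nodup_nil, hshapeR, ?_, ?_, fun s hs => hs⟩
      · intro q hq
        simp only [List.not_mem_nil, or_false]
        exact hb2 q hq
      · intro i j _; rfl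
    have hlay := pvLayerSim tm h w tile (steps+1) V F R E hb1 hcl
      ((pvCells h w).filter (fun p => V.contains p)) (R, E) (V, [], E)
      (fun p hp => List.contains_iff_mem.1 (List.mem_filter.1 hp).2) hinit
    have hsw : pvSweepA tm h w tile R (steps+1) E
        = ((pvCells h w).filter (fun p => V.contains p)).foldl
            (pvCellA tm h w tile (steps+1)) (R, E) := by
      rw [pvSweepA_eq, List.foldl_filter]
      apply PySem.List.foldl_congr_mem
      intro acc p hp
      have hin := (pvMem_cells h w p).1 hp
      have hcond : pvRget R p = V.contains p := by
        by_cases hmem : p ∈ V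
        · rw [(hb2 p hin).2 hmem]
          exact (List.contains_iff_mem.2 hmem).symm
        · have h1 : pvRget R p = false := by
            rcases Bool.eq_false_or_eq_true (pvRget R p) with hc | hc
            · exact absurd ((hb2 p hin).1 hc) hmem
            · exact hc
          have h2 : V.contains p = false := by
            rcases Bool.eq_false_or_eq_true (V.contains p) with hc | hc
            · exact absurd (List.contains_iff_mem.1 hc) hmem
            · exact hc
          rw [h1, h2]
      rw [hcond]
    have hFid : ((pvCells h w).filter (fun p => V.contains p)).filter
        (fun p => F.contains p) = F := by
      rw [List.filter_filter]
      have hcongr : ∀ p ∈ pvCells h w, (F.contains p && V.contains p)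
          = F.contains p := by
        intro p _
        rcases Bool.eq_false_or_eq_true (F.contains p) with hc | hc
        · have hpF : p ∈ F := List.contains_iff_mem.1 hc
          have hpV : V.contains p = true := List.contains_iff_mem.2 (hFV p hpF)
          rw [hc, hpV, Bool.and_true]
        · rw [hc, Bool.false_and]
      rw [List.filter_congr hcongr]
      exact pvFilter_cells_eq h w F hFnd hFpw (fun p hp => hb1 p (hFV p hp))
    rw [hsw.symm, hFid] at hlay
    have hmr := pvMeqR tm h w V R E _ _ hlay hshapeR hb2
    have hEeq : (pvSweepA tm h w tile R (steps+1) E).2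
        = (F.foldl (pvCellB tm h w tile (steps+1)) (V, [], E)).2.2 := hlay.1
    by_cases hFnil : F = []
    · subst hFnil
      simp only [List.foldl_nil] at hlay hmr hEeq
      have hMR : (pvSweepA tm h w tile R (steps+1) E).1 = R := hmr.2 (by simp)
      simp only [pvLoopA, pvLoopB]
      rw [if_pos (by rw [hMR]; exact beq_self_eq_true R), if_pos (by rfl)]
      exact hEeq
    · have hBstep : pvLoopB tm h w tile (f+1) V F steps E
          = pvLoopB tm h w tile f (F.foldl (pvCellB tm h w tile (steps+1)) (V, [], E)).1
              (PySem.List.sorted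
                (F.foldl (pvCellB tm h w tile (steps+1)) (V, [], E)).2.1
                (fun q => q.2 * w + q.1) false)
              (steps+1) (F.foldl (pvCellB tm h w tile (steps+1)) (V, [], E)).2.2 := by
        simp only [pvLoopB]
        rw [if_neg (by simpa using hFnil)]
      by_cases hd : (F.foldl (pvCellB tm h w tile (steps+1)) (V, [], E)).2.1 = []
      · have hMA : (pvSweepA tm h w tile R (steps+1) E).1 = R := hmr.2 hd
        simp only [pvLoopA]
        rw [if_pos (by rw [hMA]; exact beq_self_eq_true R)]
        rw [hBstep, hd]
        rw [show PySem.List.sorted ([] : List (Int × Int)) (fun q => q.2 * w + q.1) false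
          = [] from rfl]
        rw [pvLoopB_nilF]
        exact hEeq
      · have hMA : (pvSweepA tm h w tile R (steps+1) E).1 ≠ R := fun hcon => hd (hmr.1 hcon)
        simp only [pvLoopA]
        rw [if_neg (by simpa using hMA)]
        rw [hBstep, hEeq]
        obtain ⟨hE', hV', hdisc', hnd', hshape', hm1', hout', hmono'⟩ := hlay
        have hd1cells : ∀ p ∈ (F.foldl (pvCellB tm h w tile (steps+1)) (V, [], E)).2.1,
            pvInRange h w p := fun p hp => (hdisc' p hp).1
        have hd1perm : (F.foldl (pvCellB tm h w tile (steps+1)) (V, [], E)).2.1.Perm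
            ((pvCells h w).filter
              (fun p => (F.foldl (pvCellB tm h w tile (steps+1)) (V, [], E)).2.1.contains p)) := by
          rw [List.perm_ext_iff_of_nodup hnd' ((pvCells_nodup h w).filter _)]
          intro a
          rw [List.mem_filter]
          constructor
          · intro ha
            exact ⟨(pvMem_cells h w a).2 (hd1cells a ha), List.contains_iff_mem.2 ha⟩
          · intro ⟨_, hc⟩
            exact List.contains_iff_mem.1 hc
        have hFfin : PySem.List.sorted
            (F.foldl (pvCellB tm h w tile (steps+1)) (V, [], E)).2.1
            (fun q => q.2 * w + q.1) false
            = (pvCells h w).filter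
                (fun p => (F.foldl (pvCellB tm h w tile (steps+1)) (V, [], E)).2.1.contains p) := by
          have hpair : ((pvCells h w).filter
              (fun p => (F.foldl (pvCellB tm h w tile (steps+1)) (V, [], E)).2.1.contains p)).Pairwise
              (fun a b => pvKeyOf w a < pvKeyOf w b) := (pvCells_pairwise h w).filter _
          have := PySem.List.sorted_eq_of_perm_of_pairwise_lt
            (F.foldl (pvCellB tm h w tile (steps+1)) (V, [], E)).2.1
            ((pvCells h w).filter
              (fun p => (F.foldl (pvCellB tm h w tile (steps+1)) (V, [], E)).2.1.contains p))
            (pvKeyOf w) hd1perm.symm hpair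
          simpa [pvKeyOf] using this
        have hFfinMem : ∀ p, p ∈ PySem.List.sorted
            (F.foldl (pvCellB tm h w tile (steps+1)) (V, [], E)).2.1
            (fun q => q.2 * w + q.1) false
            ↔ p ∈ (F.foldl (pvCellB tm h w tile (steps+1)) (V, [], E)).2.1 := by
          intro p
          rw [hFfin, List.mem_filter]
          constructor
          · intro ⟨_, hc⟩; exact List.contains_iff_mem.1 hc
          · intro hp
            exact ⟨(pvMem_cells h w p).2 (hd1cells p hp), List.contains_iff_mem.2 hp⟩
        apply ih
        refine ⟨hshape', ?_, ?_, ?_, ?_, ?_, ?_, ?_⟩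
        · intro q hq
          rw [hV'] at hq
          rcases List.mem_append.1 hq with hq' | hq'
          · exact hb1 q hq'
          · exact hd1cells q hq'
        · intro q hq
          rw [hm1' q hq, hV']
          rw [List.mem_append]
        · rw [hV']
          refine List.Nodup.append hVnd hnd' ?_
          intro a haV had
          exact (hdisc' a had).2.2 haV
        · rw [hFfin]
          exact (pvCells_nodup h w).filter _
        · intro q hq
          rw [hV', List.mem_append]
          exact Or.inr ((hFfinMem q).1 hq)
        · rw [hFfin]
          exact (pvCells_pairwise h w).filter _
        · intro p hp hnp
          have hpd1 : p ∉ (F.foldl (pvCellB tm h w tile (steps+1)) (V, [], E)).2.1 :=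
            fun hmem => hnp ((hFfinMem p).2 hmem)
          rw [hV'] at hp
          rcases List.mem_append.1 hp with hpV | hpd
          · by_cases hpF : p ∈ F
            · have hmid := pvLayerEstab tm h w tile (steps+1) F (V, [], E) p hpF
              intro q hq hqin
              obtain ⟨h1, h2⟩ := hmid q hq hqin
              refine ⟨fun hsp => by rw [hV'] at *; exact h1 hsp, fun hlm hnt => h2 hlm hnt⟩
            · have hold := hcl p hpV hpF
              intro q hq hqin
              obtain ⟨h1, h2⟩ := hold q hq hqin
              refine ⟨fun hsp => ?_, fun hlm hnt => ?_⟩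
              · rw [hV', List.mem_append]
                exact Or.inl (h1 hsp)
              · exact hEeq ▸ hmono' _ (h2 hlm hnt)
          · exact absurd hpd hpd1

-- ---------- the initial state at a landmark, and per-landmark equality (A vs frontier loop) ----------
theorem pvRget_zeros (tm : List (List Char)) (q : Int × Int) (hqx : 0 ≤ q.1) (hqy : 0 ≤ q.2) :
    pvRget (tm.map (fun row => row.map (fun _ => false))) q = false := by
  obtain ⟨qx, qy⟩ := q
  rw [pvRget_nonneg _ qx qy hqx hqy]
  by_cases hy : qy.toNat < tm.length
  · have : (tm.map (fun row => row.map (fun _ => false))).getD qy.toNat []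
        = tm[qy.toNat].map (fun _ => false) := by
      rw [List.getD_eq_getElem?_getD, List.getElem?_map, List.getElem?_eq_getElem hy]
      rfl
    rw [this]
    by_cases hx : qx.toNat < tm[qy.toNat].length
    · rw [List.getD_eq_getElem?_getD, List.getElem?_map, List.getElem?_eq_getElem hx]
      rfl
    · rw [List.getD_eq_getElem?_getD, List.getElem?_eq_none_iff.2 (by simpa using hx)]
      rfl
  · have hnone : (tm.map (fun row => row.map (fun _ => false))).getD qy.toNat [] = [] := by
      rw [List.getD_eq_getElem?_getD, List.getElem?_eq_none_iff.2 (by simpa using hy)]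
      rfl
    rw [hnone]
    rfl

theorem pvShape_zeros (tm : List (List Char)) :
    pvShape (tm.map (fun row => row.map (fun _ => false))) tm := by
  refine ⟨by simp, ?_⟩
  intro i
  rw [List.getElem?_map]
  cases tm[i]? <;> simp

theorem pvInitInv (tm : List (List Char)) (h w : Int) (tile : Char) (x y : Int)
    (hin : pvInRange h w (x, y)) (hval : pvTileAt tm y x ≠ '?') :
    pvInv tm h w tile
      (pvSet2 (tm.map (fun row => row.map (fun _ => false))) y x true)
      [(x, y)] [(x, y)] PySem.Dict.empty := by
  obtain ⟨hx0, hxw, hy0, hyh⟩ := hin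
  simp only at hx0 hxw hy0 hyh
  obtain ⟨hylen, hxlen, _⟩ := pvTile_valid tm y x hx0 hy0 hval
  have hzlen : y.toNat < (tm.map (fun row => row.map (fun _ => false))).length := by
    simpa using hylen
  have hzrow : x.toNat < ((tm.map (fun row => row.map (fun _ => false))).getD y.toNat []).length := by
    have : (tm.map (fun row => row.map (fun _ => false))).getD y.toNat []
        = tm[y.toNat].map (fun _ => false) := by
      rw [List.getD_eq_getElem?_getD, List.getElem?_map, List.getElem?_eq_getElem hylen]
      rfl
    rw [this]
    simpa using hxlen
  refine ⟨pvShape_set2 _ tm x y true hx0 hy0 (pvShape_zeros tm), ?_, ?_, List.nodup_singleton _,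
    List.nodup_singleton _, fun q hq => hq, List.pairwise_singleton _ _, ?_⟩
  · intro q hq
    rw [List.mem_singleton.1 hq]
    exact ⟨hx0, hxw, hy0, hyh⟩
  · intro q hq
    by_cases hque : q = (x, y)
    · subst hque
      rw [pvRget_set2_self _ x y true hx0 hy0 hzlen hzrow]
      simp
    · rw [pvRget_set2_other _ x y true q hx0 hy0 hq.1 hq.2.2.1 hque,
        pvRget_zeros tm q hq.1 hq.2.2.1]
      simp [hque]
  · intro p hp hnp
    rw [List.mem_singleton.1 hp] at hnp
    exact absurd (List.mem_singleton_self _) hnp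

theorem pvOfList_singleton (q : Int × Int) : PySem.Set.ofList [q] = [q] := rfl

theorem pvQmark_not_landmark : ('?' ∈ ('@' :: (pvKeyTiles ++ pvDoorTiles))) = False := by
  decide

theorem pvLandmark_eq (tm : List (List Char)) (x y : Int)
    (hin : pvInRange (PySem.List.len tm) (PySem.List.len (PySem.List.pyGetD tm 0 [])) (x, y))
    (hval : pvTileAt tm y x ≠ '?') :
    pvExitsFromLandmarkA tm (x, y)
      = pvBfsExitsB tm (PySem.List.len tm) (PySem.List.len (PySem.List.pyGetD tm 0 [])) x y := by
  unfold pvExitsFromLandmarkA pvBfsExitsB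
  rw [pvOfList_singleton]
  exact pvLoopSim tm _ _ _ _ _ _ _ _ _
    (pvInitInv tm _ _ (pvTileAt tm y x) x y hin hval)

set_option maxHeartbeats 2000000 in
theorem pvGraph_eq_mid (tiles : String) : graph_from_tiles tiles = pvGraphMid tiles := by
  simp only [graph_from_tiles, pvGraphMid]
  apply congrArg
  apply PySem.List.foldl_congr_mem
  intro g y hy
  apply PySem.List.foldl_congr_mem
  intro g' x hx
  rw [PySem.List.mem_pyRange_one] at hy hx
  by_cases hlm : PySem.Chars.isIn
      [pvTileAt (((PySem.Str.split? (PySem.Str.strip tiles) "\n").getD []).map String.toList) y x]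
      ('@' :: (pvKeyTiles ++ pvDoorTiles)) = true
  · rw [if_pos hlm, if_pos hlm]
    have hmem := (pvIsIn_singleton _ _).1 hlm
    have hval : pvTileAt
        (((PySem.Str.split? (PySem.Str.strip tiles) "\n").getD []).map String.toList) y x
        ≠ '?' := by
      intro hq
      rw [hq] at hmem
      exact (pvQmark_not_landmark ▸ hmem)
    rw [pvLandmark_eq _ x y ⟨hx.1, hx.2, hy.1, hy.2⟩ hval]
  · rw [if_neg hlm, if_neg hlm]

-- ---------- character-class bridges (A's membership lists vs B's code-point ranges) ----------
theorem pvChar_le_iff (c d : Char) : (c ≤ d) ↔ c.toNat ≤ d.toNat := by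
  rw [Char.le_def]; exact ⟨UInt32.le_iff_toNat_le.mp, UInt32.le_iff_toNat_le.mpr⟩

theorem pvChar_eq_iff (c d : Char) : (c = d) ↔ c.toNat = d.toNat :=
  ⟨fun h => by rw [h], fun h => Char.ext (UInt32.toNat_inj.mp h)⟩

theorem pvMem_keys_iff (c : Char) : c ∈ pvKeyTiles ↔ 97 ≤ c.toNat ∧ c.toNat ≤ 122 := by
  have e : pvKeyTiles = ['a','b','c','d','e','f','g','h','i','j','k','l','m','n','o','p','q','r','s','t','u','v','w','x','y','z'] := by decide
  rw [e]
  simp only [List.mem_cons, List.not_mem_nil, or_false, pvChar_eq_iff,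
    show ('a':Char).toNat = 97 from rfl, show ('b':Char).toNat = 98 from rfl,
    show ('c':Char).toNat = 99 from rfl, show ('d':Char).toNat = 100 from rfl,
    show ('e':Char).toNat = 101 from rfl, show ('f':Char).toNat = 102 from rfl,
    show ('g':Char).toNat = 103 from rfl, show ('h':Char).toNat = 104 from rfl,
    show ('i':Char).toNat = 105 from rfl, show ('j':Char).toNat = 106 from rfl,
    show ('k':Char).toNat = 107 from rfl, show ('l':Char).toNat = 108 from rfl,
    show ('m':Char).toNat = 109 from rfl, show ('n':Char).toNat = 110 from rfl,
    show ('o':Char).toNat = 111 from rfl, show ('p':Char).toNat = 112 from rfl,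
    show ('q':Char).toNat = 113 from rfl, show ('r':Char).toNat = 114 from rfl,
    show ('s':Char).toNat = 115 from rfl, show ('t':Char).toNat = 116 from rfl,
    show ('u':Char).toNat = 117 from rfl, show ('v':Char).toNat = 118 from rfl,
    show ('w':Char).toNat = 119 from rfl, show ('x':Char).toNat = 120 from rfl,
    show ('y':Char).toNat = 121 from rfl, show ('z':Char).toNat = 122 from rfl]
  omega

theorem pvMem_doors_iff (c : Char) : c ∈ pvDoorTiles ↔ 65 ≤ c.toNat ∧ c.toNat ≤ 90 := by
  have e : pvDoorTiles = ['A','B','C','D','E','F','G','H','I','J','K','L','M','N','O','P','Q','R','S','T','U','V','W','X','Y','Z'] := by decide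
  rw [e]
  simp only [List.mem_cons, List.not_mem_nil, or_false, pvChar_eq_iff,
    show ('A':Char).toNat = 65 from rfl, show ('B':Char).toNat = 66 from rfl,
    show ('C':Char).toNat = 67 from rfl, show ('D':Char).toNat = 68 from rfl,
    show ('E':Char).toNat = 69 from rfl, show ('F':Char).toNat = 70 from rfl,
    show ('G':Char).toNat = 71 from rfl, show ('H':Char).toNat = 72 from rfl,
    show ('I':Char).toNat = 73 from rfl, show ('J':Char).toNat = 74 from rfl,
    show ('K':Char).toNat = 75 from rfl, show ('L':Char).toNat = 76 from rfl,
    show ('M':Char).toNat = 77 from rfl, show ('N':Char).toNat = 78 from rfl,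
    show ('O':Char).toNat = 79 from rfl, show ('P':Char).toNat = 80 from rfl,
    show ('Q':Char).toNat = 81 from rfl, show ('R':Char).toNat = 82 from rfl,
    show ('S':Char).toNat = 83 from rfl, show ('T':Char).toNat = 84 from rfl,
    show ('U':Char).toNat = 85 from rfl, show ('V':Char).toNat = 86 from rfl,
    show ('W':Char).toNat = 87 from rfl, show ('X':Char).toNat = 88 from rfl,
    show ('Y':Char).toNat = 89 from rfl, show ('Z':Char).toNat = 90 from rfl]
  omega

theorem pvLet_iff (c : Char) :
    pvLet c = true ↔ ((97 ≤ c.toNat ∧ c.toNat ≤ 122) ∨ (65 ≤ c.toNat ∧ c.toNat ≤ 90)) := by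
  simp only [pvLet, Bool.or_eq_true, Bool.and_eq_true, decide_eq_true_eq, pvChar_le_iff,
    show ('a':Char).toNat = 97 from rfl, show ('z':Char).toNat = 122 from rfl,
    show ('A':Char).toNat = 65 from rfl, show ('Z':Char).toNat = 90 from rfl]

theorem pvMem_letters (c : Char) :
    PySem.Chars.isIn [c] (pvKeyTiles ++ pvDoorTiles) = pvLet c := by
  rw [Bool.eq_iff_iff, pvIsIn_singleton, List.mem_append, pvMem_keys_iff, pvMem_doors_iff,
    pvLet_iff]

theorem pvMem_lm (c : Char) :
    PySem.Chars.isIn [c] ('@' :: (pvKeyTiles ++ pvDoorTiles)) = (c == '@' || pvLet c) := by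
  rw [Bool.eq_iff_iff, pvIsIn_singleton, List.mem_cons, List.mem_append, pvMem_keys_iff,
    pvMem_doors_iff]
  simp only [Bool.or_eq_true, beq_iff_eq, pvLet_iff]

theorem pvFree_eq (c : Char) :
    PySem.Chars.isIn [c] pvSpaceTiles = (c == '.' || c == '@') := by
  rw [Bool.eq_iff_iff, pvIsIn_singleton]
  simp only [pvSpaceTiles, List.mem_cons, List.not_mem_nil, or_false, Bool.or_eq_true,
    beq_iff_eq]

theorem pvAnd_rot (a b d : Bool) : (a && b && d) = (a && d && b) := by
  cases a <;> cases b <;> cases d <;> rfl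

-- ---------- the cropped grid reads ----------
theorem pvTileAt_default (tm : List (List Char)) (y x : Int) (hx : 0 ≤ x) (hy : 0 ≤ y)
    (hge : ¬ x.toNat < (tm.getD y.toNat []).length) : pvTileAt tm y x = '?' := by
  have hrw : pvTileAt tm y x = (tm.getD y.toNat []).getD x.toNat '?' := by
    simp only [pvTileAt, PySem.List.pyGetD_of_nonneg _ _ hy, PySem.List.pyGetD_of_nonneg _ _ hx]
  rw [hrw, List.getD_eq_getElem?_getD, List.getElem?_eq_none_iff.2 (by omega)]
  rfl

theorem pvAt_crop (tm : List (List Char)) (w : Int) (hw : 0 ≤ w) (y x : Int)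
    (hx : 0 ≤ x) (hxw : x < w) (hy : 0 ≤ y) (hyh : y.toNat < tm.length) :
    pvAt (tm.map (fun row => PySem.List.slice row none (some w))) y x
      = if x.toNat < (tm.getD y.toNat []).length then pvTileAt tm y x else ' ' := by
  have hrow' : (List.map (fun row => List.take w.toNat row) tm).getD y.toNat []
      = tm[y.toNat].take w.toNat := by
    rw [List.getD_eq_getElem?_getD, List.getElem?_map, List.getElem?_eq_getElem hyh]
    rfl
  have htm : tm.getD y.toNat [] = tm[y.toNat] := by
    simp [List.getD_eq_getElem?_getD, List.getElem?_eq_getElem hyh]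
  have hA : pvAt (tm.map (fun row => PySem.List.slice row none (some w))) y x
      = (tm[y.toNat].take w.toNat).getD x.toNat ' ' := by
    simp only [pvAt, PySem.List.pyGetD_of_nonneg _ _ hy, PySem.List.pyGetD_of_nonneg _ _ hx,
      PySem.List.slice_to _ hw, hrow']
  have hT : pvTileAt tm y x = tm[y.toNat].getD x.toNat '?' := by
    simp only [pvTileAt, PySem.List.pyGetD_of_nonneg _ _ hy, PySem.List.pyGetD_of_nonneg _ _ hx,
      htm]
  rw [hA, hT, htm]
  by_cases hlt : x.toNat < tm[y.toNat].length
  · rw [if_pos hlt]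
    have hxw' : x.toNat < w.toNat := by omega
    have h1 : x.toNat < (tm[y.toNat].take w.toNat).length := by
      rw [List.length_take]; omega
    rw [List.getD_eq_getElem?_getD, List.getElem?_eq_getElem h1,
      List.getD_eq_getElem?_getD, List.getElem?_eq_getElem hlt]
    simp [List.getElem_take]
  · rw [if_neg hlt, List.getD_eq_getElem?_getD, List.getElem?_eq_none_iff.2 (by
      rw [List.length_take]; omega)]
    rfl

-- compat of the two grid reads on in-range cells: equal, or the ('?', ' ') default pair
def pvCompat (tm grid : List (List Char)) (h w : Int) : Prop :=
  ∀ q : Int × Int, pvInRange h w q →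
    pvAt grid q.2 q.1 = pvTileAt tm q.2 q.1 ∨
      (pvAt grid q.2 q.1 = ' ' ∧ pvTileAt tm q.2 q.1 = '?')

theorem pvCompat_crop (tm : List (List Char)) (w : Int) (hw : 0 ≤ w) :
    pvCompat tm (tm.map (fun row => PySem.List.slice row none (some w)))
      (PySem.List.len tm) w := by
  intro q hq
  obtain ⟨hx, hxw, hy, hyh⟩ := hq
  have hyh' : q.2.toNat < tm.length := by
    simp only [PySem.List.len] at hyh; omega
  rw [pvAt_crop tm w hw q.2 q.1 hx hxw hy hyh']
  by_cases hlt : q.1.toNat < (tm.getD q.2.toNat []).length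
  · rw [if_pos hlt]; exact Or.inl rfl
  · rw [if_neg hlt]
    exact Or.inr ⟨rfl, pvTileAt_default tm q.2 q.1 hx hy hlt⟩

-- ---------- the frontier loop vs B's per-layer set BFS ----------
theorem pvScan_swap (g : List (List Char)) (h w : Int) (origin : Char) (dist : Int)
    (st : PySem.Set (Int × Int) × PySem.Dict String Int) (p : Int × Int) :
    pvScan g h w origin dist st (Prod.swap p)
      = (pvNeighs p).foldl (fun st q => pvNStep g h w origin dist st (Prod.swap q)) st := by
  obtain ⟨x, y⟩ := p
  have e1 : y + (-1 : Int) = y - 1 := by ring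
  have e2 : x + (-1 : Int) = x - 1 := by ring
  have e3 : y + (0 : Int) = y := by ring
  have e4 : x + (0 : Int) = x := by ring
  simp only [pvScan, pvNeighs, List.foldl_cons, List.foldl_nil, Prod.swap_prod_mk,
    e1, e2, e3, e4]

theorem pvGuard_swap (h w : Int) (q : Int × Int) :
    (0 ≤ q.2 && q.2 < h && 0 ≤ q.1 && q.1 < w) = pvGuard h w q := by
  rw [Bool.eq_iff_iff]
  simp only [pvGuard, Bool.and_eq_true, decide_eq_true_eq]
  tauto

-- relation between the frontier loop's per-layer state (V, d, E) and B's (nxt, E)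
def pvSRel (h w : Int) (V0 : List (Int × Int))
    (st : PySem.Set (Int × Int) × List (Int × Int) × PySem.Dict String Int)
    (st' : PySem.Set (Int × Int) × PySem.Dict String Int) : Prop :=
  st.2.2 = st'.2 ∧
  st.1 = V0 ++ st.2.1 ∧
  st.2.1.Nodup ∧
  (∀ p ∈ st.2.1, pvInRange h w p ∧ p ∉ V0 ∧ Prod.swap p ∈ st'.1) ∧
  (∀ n ∈ st'.1, Prod.swap n ∈ V0 ∨ Prod.swap n ∈ st.2.1) ∧
  st'.1.Nodup

theorem pvStepSim (tm grid : List (List Char)) (h w : Int)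
    (hcomp : pvCompat tm grid h w) (tile : Char) (steps : Int) (V0 : List (Int × Int))
    (st : PySem.Set (Int × Int) × List (Int × Int) × PySem.Dict String Int)
    (st' : PySem.Set (Int × Int) × PySem.Dict String Int) (q : Int × Int)
    (hrel : pvSRel h w V0 st st') :
    pvSRel h w V0 (pvBStep tm h w tile steps st q)
      (pvNStep grid h w tile steps st' (Prod.swap q)) := by
  obtain ⟨qx, qy⟩ := q
  obtain ⟨V1, d, E⟩ := st
  obtain ⟨N, E'⟩ := st'
  obtain ⟨hE, hV, hnd, hd, hN, hNnd⟩ := hrel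
  simp only at hE hV hnd hd hN hNnd
  simp only [Prod.swap_prod_mk]
  by_cases hg : pvGuard h w (qx, qy) = true
  · have hqin := (pvGuard_iff h w (qx, qy)).1 hg
    have hg' : (0 ≤ qy && qy < h && 0 ≤ qx && qx < w) = true := by
      have := pvGuard_swap h w (qx, qy)
      simp only at this
      rw [this]; exact hg
    have hread := hcomp (qx, qy) hqin
    simp only at hread
    have hEcond :
        pvExitAddB tile steps E' (pvTileAt tm qy qx)
          = (if pvLet (pvAt grid qy qx) && !(pvAt grid qy qx == tile)
               && !(E'.contains (String.ofList [pvAt grid qy qx])) then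
               E'.insert (String.ofList [pvAt grid qy qx]) steps
             else E') := by
      rcases hread with hceq | ⟨hc1, hc2⟩
      · rw [hceq]
        unfold pvExitAddB
        rw [pvMem_letters, pvAnd_rot]
      · rw [hc1, hc2]
        unfold pvExitAddB
        rw [show PySem.Chars.isIn ['?'] (pvKeyTiles ++ pvDoorTiles) = false from by decide,
          show pvLet ' ' = false from rfl]
        simp
    have hFcond : PySem.Chars.isIn [pvTileAt tm qy qx] pvSpaceTiles
        = (pvAt grid qy qx == '.' || pvAt grid qy qx == '@') := by
      rcases hread with hceq | ⟨hc1, hc2⟩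
      · rw [hceq, pvFree_eq]
      · rw [hc1, hc2]
        decide
    simp only [pvBStep, pvNStep, hg, hg', if_pos]
    rw [show pvExitAddB tile steps E (pvTileAt tm qy qx)
        = pvExitAddB tile steps E' (pvTileAt tm qy qx) from by rw [hE], hEcond]
    by_cases hsp : PySem.Chars.isIn [pvTileAt tm qy qx] pvSpaceTiles = true
    · have hfree : (pvAt grid qy qx == '.' || pvAt grid qy qx == '@') = true := by
        rw [← hFcond]; exact hsp
      rw [if_pos hfree]
      by_cases hvq : PySem.Set.contains V1 (qx, qy) = true
      · have hqV1 : (qx, qy) ∈ V1 := PySem.Set.contains_iff V1 (qx, qy) |>.1 hvq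
        rw [if_neg (by rw [hsp, hvq]; simp)]
        refine ⟨rfl, hV, hnd, ?_, ?_, ?_⟩
        · intro p hp
          obtain ⟨h1, h2, h3⟩ := hd p hp
          exact ⟨h1, h2, by rw [PySem.Set.mem_add]; exact Or.inl h3⟩
        · intro n hn
          rw [PySem.Set.mem_add] at hn
          rcases hn with hn | rfl
          · exact hN n hn
          · show (qx, qy) ∈ V0 ∨ (qx, qy) ∈ d
            rw [hV] at hqV1
            exact List.mem_append.1 hqV1
        · exact PySem.Set.nodup_add _ _ hNnd
      · have hvq' : PySem.Set.contains V1 (qx, qy) = false := by simpa using hvq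
        have hqnV1 : (qx, qy) ∉ V1 := fun hm => by
          rw [(PySem.Set.contains_iff V1 (qx, qy)).2 hm] at hvq'; cases hvq'
        rw [if_pos (by rw [hsp, hvq']; rfl)]
        have hadd : PySem.Set.add V1 (qx, qy) = V1 ++ [(qx, qy)] := by
          unfold PySem.Set.add
          rw [hvq']
          simp
        refine ⟨rfl, ?_, ?_, ?_, ?_, ?_⟩
        · show PySem.Set.add V1 (qx, qy) = V0 ++ (d ++ [(qx, qy)])
          rw [hadd, hV, List.append_assoc]
        · exact List.Nodup.append hnd (List.nodup_singleton _)
            (by intro a ha hb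
                rw [List.mem_singleton.1 hb] at ha
                exact hqnV1 (by rw [hV]; exact List.mem_append_right _ ha))
        · intro p hp
          rcases List.mem_append.1 hp with hp' | hp'
          · obtain ⟨h1, h2, h3⟩ := hd p hp'
            exact ⟨h1, h2, by rw [PySem.Set.mem_add]; exact Or.inl h3⟩
          · rw [List.mem_singleton.1 hp']
            refine ⟨hqin, fun hmV0 => hqnV1 (by rw [hV]; exact List.mem_append_left _ hmV0), ?_⟩
            simp only [Prod.swap_prod_mk]
            rw [PySem.Set.mem_add]
            exact Or.inr rfl
        · intro n hn
          rw [PySem.Set.mem_add] at hn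
          rcases hn with hn | rfl
          · rcases hN n hn with h1 | h1
            · exact Or.inl h1
            · exact Or.inr (List.mem_append_left _ h1)
          · show (qx, qy) ∈ V0 ∨ (qx, qy) ∈ d ++ [(qx, qy)]
            exact Or.inr (List.mem_append_right _ (List.mem_singleton_self _))
        · exact PySem.Set.nodup_add _ _ hNnd
    · have hsp' : PySem.Chars.isIn [pvTileAt tm qy qx] pvSpaceTiles = false := by
        simpa using hsp
      have hfree' : (pvAt grid qy qx == '.' || pvAt grid qy qx == '@') = false := by
        rw [← hFcond]; exact hsp'
      simp only [hsp', hfree', Bool.false_and, Bool.false_eq_true, if_false]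
      exact ⟨rfl, hV, hnd, hd, hN, hNnd⟩
  · have hg0 : pvGuard h w (qx, qy) = false := by simpa using hg
    have hg' : (0 ≤ qy && qy < h && 0 ≤ qx && qx < w) = false := by
      have := pvGuard_swap h w (qx, qy)
      simp only at this
      rw [this]; exact hg0
    simp only [pvBStep, pvNStep, hg0, hg', Bool.false_eq_true, if_false]
    exact ⟨hE, hV, hnd, hd, hN, hNnd⟩

theorem pvLayerRel (tm grid : List (List Char)) (h w : Int)
    (hcomp : pvCompat tm grid h w) (tile : Char) (steps : Int) (V : List (Int × Int))
    (F : List (Int × Int)) (E : PySem.Dict String Int) :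
    pvSRel h w V (F.foldl (pvCellB tm h w tile steps) (V, [], E))
      ((F.map Prod.swap).foldl (pvScan grid h w tile steps) (PySem.Set.ofList [], E)) := by
  rw [List.foldl_map]
  have hinit : pvSRel h w V (V, [], E) (PySem.Set.ofList [], E) := by
    refine ⟨rfl, by simp, List.nodup_nil, by simp, ?_, List.nodup_nil⟩
    intro n hn
    cases hn
  refine pvFoldlRel (pvSRel h w V) _ _ F _ _ ?_ hinit
  intro s t p _ hr
  rw [pvCellB_eq, pvScan_swap]
  refine pvFoldlRel (pvSRel h w V) _ _ (pvNeighs p) s t ?_ hr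
  intro s t q _ hr
  exact pvStepSim tm grid h w hcomp tile steps V s t q hr

-- strictify a key-sorted list of distinct in-range cells
theorem pvKeyOf_inj (w : Int) (a b : Int × Int) (ha : pvInRange 0 w a → True)
    (hax : 0 ≤ a.1) (haxw : a.1 < w) (hbx : 0 ≤ b.1) (hbxw : b.1 < w)
    (hk : pvKeyOf w a = pvKeyOf w b) : a = b := by
  obtain ⟨ax, ay⟩ := a
  obtain ⟨bx, by'⟩ := b
  simp only [pvKeyOf] at hk
  simp only at hax haxw hbx hbxw
  have hy : ay = by' := by
    rcases lt_trichotomy ay by' with hlt | heq | hgt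
    · nlinarith
    · exact heq
    · nlinarith
  subst hy
  have : ax = bx := by omega
  rw [this]

theorem pvPairwise_lt (w : Int) (l : List (Int × Int))
    (hle : l.Pairwise (fun a b => pvKeyOf w a ≤ pvKeyOf w b)) (hnd : l.Nodup)
    (hin : ∀ p ∈ l, 0 ≤ p.1 ∧ p.1 < w) :
    l.Pairwise (fun a b => pvKeyOf w a < pvKeyOf w b) := by
  refine List.Pairwise.imp_of_mem ?_ (hle.and hnd)
  intro a b ha hb hab
  rcases lt_or_eq_of_le hab.1 with hlt | heq
  · exact hlt
  · exact absurd (pvKeyOf_inj w a b (fun _ => trivial) (hin a ha).1 (hin a ha).2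
      (hin b hb).1 (hin b hb).2 heq) hab.2

theorem pvLoopRel (tm grid : List (List Char)) (h w : Int)
    (hcomp : pvCompat tm grid h w) (tile : Char) :
    ∀ (f : Nat) (V F : List (Int × Int)) (seen : PySem.Set (Int × Int)) (dist : Int)
      (E : PySem.Dict String Int),
      (∀ n, n ∈ seen ↔ Prod.swap n ∈ V) →
      pvLoopB tm h w tile f V F dist E
        = pvBfs grid h w tile f seen (F.map Prod.swap) dist E := by
  intro f
  induction f with
  | zero => intro V F seen dist E _; rfl
  | succ f ih =>
    intro V F seen dist E hseen
    by_cases hF : F = []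
    · subst hF
      simp only [pvLoopB, pvBfs, List.map_nil, List.isEmpty_nil]
      rfl
    · have hrel := pvLayerRel tm grid h w hcomp tile (dist + 1) V F E
      set st := F.foldl (pvCellB tm h w tile (dist + 1)) (V, [], E) with hst
      set st' := (F.map Prod.swap).foldl (pvScan grid h w tile (dist + 1))
        (PySem.Set.ofList [], E) with hst'
      obtain ⟨hE, hV, hnd, hd, hN, hNnd⟩ := hrel
      have hstepA : pvLoopB tm h w tile (f+1) V F dist E
          = pvLoopB tm h w tile f st.1
              (PySem.List.sorted st.2.1 (fun q => q.2 * w + q.1) false) (dist+1) st.2.2 := by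
        simp only [pvLoopB]
        rw [if_neg (by simpa using hF)]
      have hstepB : pvBfs grid h w tile (f+1) seen (F.map Prod.swap) dist E
          = pvBfs grid h w tile f (PySem.Set.union seen st'.1)
              (PySem.List.sorted (PySem.Set.diff st'.1 seen) (fun p => p.1 * w + p.2) false)
              (dist+1) st'.2 := by
        simp only [pvBfs]
        rw [if_neg (by simp [hF])]
      rw [hstepA, hstepB, hE]
      -- the sorted fresh layer is the swapped sorted discovered list
      have hdmem : ∀ n, n ∈ PySem.Set.diff st'.1 seen ↔ Prod.swap n ∈ st.2.1 := by
        intro n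
        rw [PySem.Set.mem_diff, hseen]
        constructor
        · rintro ⟨h1, h2⟩
          rcases hN n h1 with h3 | h3
          · exact absurd h3 h2
          · exact h3
        · intro h1
          obtain ⟨_, h2, h3⟩ := hd _ h1
          rw [Prod.swap_swap] at h3
          exact ⟨h3, h2⟩
      have hSnd : (PySem.List.sorted st.2.1 (fun q => q.2 * w + q.1) false).Nodup :=
        (PySem.List.sorted_perm st.2.1 _ false).nodup_iff.2 hnd
      have hSmem : ∀ p, p ∈ PySem.List.sorted st.2.1 (fun q => q.2 * w + q.1) false
          ↔ p ∈ st.2.1 := fun p => PySem.List.mem_sorted _ _ _ _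
      have hperm : ((PySem.List.sorted st.2.1 (fun q => q.2 * w + q.1) false).map
          Prod.swap).Perm (PySem.Set.diff st'.1 seen) := by
        rw [List.perm_ext_iff_of_nodup
          ((List.nodup_map_iff_inj_on hSnd).2 (fun a _ b _ hab => Prod.swap_injective hab))
          (PySem.Set.nodup_diff _ _ hNnd)]
        intro n
        rw [hdmem, List.mem_map]
        constructor
        · rintro ⟨a, ha, rfl⟩
          rw [Prod.swap_swap]
          exact (hSmem a).1 ha
        · intro h1
          exact ⟨Prod.swap n, (hSmem _).2 h1, Prod.swap_swap n⟩
      have hpw : ((PySem.List.sorted st.2.1 (fun q => q.2 * w + q.1) false).map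
          Prod.swap).Pairwise (fun a b => (fun p => p.1 * w + p.2) a < (fun p => p.1 * w + p.2) b) := by
        rw [List.pairwise_map]
        have hle := PySem.List.sorted_pairwise st.2.1 (fun q => q.2 * w + q.1)
        have hlt := pvPairwise_lt w _ (hle.imp (fun hab => hab)) hSnd
          (fun p hp => ⟨((hd p ((hSmem p).1 hp)).1).1, ((hd p ((hSmem p).1 hp)).1).2.1⟩)
        exact hlt.imp (fun hab => hab)
      have hfresh : PySem.List.sorted (PySem.Set.diff st'.1 seen) (fun p => p.1 * w + p.2) false
          = (PySem.List.sorted st.2.1 (fun q => q.2 * w + q.1) false).map Prod.swap :=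
        PySem.List.sorted_eq_of_perm_of_pairwise_lt _ _ _ hperm hpw
      rw [hfresh]
      apply ih
      intro n
      rw [PySem.Set.mem_union, hseen, hV]
      constructor
      · rintro (h1 | h1)
        · exact List.mem_append_left _ h1
        · rcases hN n h1 with h2 | h2
          · exact List.mem_append_left _ h2
          · exact List.mem_append_right _ h2
      · intro h1
        rcases List.mem_append.1 h1 with h2 | h2
        · exact Or.inl h2
        · obtain ⟨_, _, h3⟩ := hd _ h2
          rw [Prod.swap_swap] at h3
          exact Or.inr h3

-- ---------- the top-level scans: pyRange over the raw grid vs enumerate over the crop ----------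
theorem pvLen_nonneg {α : Type} (l : List α) : 0 ≤ PySem.List.len l := by
  simp [PySem.List.len]

theorem pvRow_crop (tm : List (List Char)) (w : Int) (hw : 0 ≤ w) (y : Int)
    (hy0 : 0 ≤ y) (hyh : y < PySem.List.len tm) :
    PySem.List.pyGetD (tm.map (fun row => PySem.List.slice row none (some w))) y []
      = (PySem.List.pyGetD tm y []).take w.toNat := by
  have hyh' : y.toNat < tm.length := by simp only [PySem.List.len] at hyh; omega
  have h1 : PySem.List.pyGetD tm y [] = tm[y.toNat] := by
    rw [PySem.List.pyGetD_of_nonneg _ _ hy0, List.getD_eq_getElem?_getD,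
      List.getElem?_eq_getElem hyh']
    rfl
  rw [PySem.List.pyGetD_of_nonneg _ _ hy0, List.getD_eq_getElem?_getD, List.getElem?_map,
    List.getElem?_eq_getElem hyh', h1]
  simp [PySem.List.slice_to _ hw]

theorem pvTake_read (row : List Char) (w : Int) (x : Int) (hx0 : 0 ≤ x)
    (hxm : x < PySem.List.len (row.take w.toNat)) :
    PySem.List.pyGetD (row.take w.toNat) x '?' = row.getD x.toNat '?' := by
  have hxm' : x.toNat < (row.take w.toNat).length := by
    simp only [PySem.List.len] at hxm; omega
  have hxr : x.toNat < row.length := by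
    rw [List.length_take] at hxm'; omega
  rw [PySem.List.pyGetD_of_nonneg _ _ hx0, List.getD_eq_getElem?_getD,
    List.getElem?_eq_getElem hxm', List.getD_eq_getElem?_getD, List.getElem?_eq_getElem hxr]
  simp [List.getElem_take]

theorem pvFold_eq (tm : List (List Char)) :
    (PySem.List.pyRange 0 (PySem.List.len tm) 1).foldl (fun g y =>
      (PySem.List.pyRange 0 (PySem.List.len (PySem.List.pyGetD tm 0 [])) 1).foldl (fun g x =>
        if PySem.Chars.isIn [pvTileAt tm y x] ('@' :: (pvKeyTiles ++ pvDoorTiles)) then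
          g.insert (String.ofList [pvTileAt tm y x])
            (pvBfsExitsB tm (PySem.List.len tm)
              (PySem.List.len (PySem.List.pyGetD tm 0 [])) x y).items
        else g) g)
      (PySem.Dict.empty : PySem.Dict String (List (String × Int)))
    = (PySem.List.enumerate (tm.map (fun row => PySem.List.slice row none
          (some (PySem.List.len (PySem.List.pyGetD tm 0 []))))) 0).foldl (fun gr yrow =>
        (PySem.List.enumerate yrow.2 0).foldl (fun gr xt =>
          if xt.2 == '@' || pvLet xt.2 then
            gr.insert (String.ofList [xt.2])
              (pvBfs (tm.map (fun row => PySem.List.slice row none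
                  (some (PySem.List.len (PySem.List.pyGetD tm 0 [])))))
                (PySem.List.len (tm.map (fun row => PySem.List.slice row none
                  (some (PySem.List.len (PySem.List.pyGetD tm 0 []))))))
                (PySem.List.len (PySem.List.pyGetD tm 0 []))
                xt.2
                ((PySem.List.len (tm.map (fun row => PySem.List.slice row none
                    (some (PySem.List.len (PySem.List.pyGetD tm 0 [])))))
                  * PySem.List.len (PySem.List.pyGetD tm 0 [])).toNat + 2)
                (PySem.Set.ofList [(yrow.1, xt.1)]) [(yrow.1, xt.1)] 0
                PySem.Dict.empty).items
          else gr) gr)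
      (PySem.Dict.empty : PySem.Dict String (List (String × Int))) := by
  set w : Int := PySem.List.len (PySem.List.pyGetD tm 0 []) with hwdef
  set grid := tm.map (fun row => PySem.List.slice row none (some w)) with hgdef
  have hw : 0 ≤ w := by rw [hwdef]; exact pvLen_nonneg _
  have hh : PySem.List.len grid = PySem.List.len tm := by
    rw [hgdef]; simp [PySem.List.len]
  rw [PySem.List.enumerate_eq_map_pyRange grid ([] : List Char), List.foldl_map, hh]
  apply PySem.List.foldl_congr_mem
  intro g y hy
  rw [PySem.List.mem_pyRange_one] at hy
  rw [pvRow_crop tm w hw y hy.1 hy.2,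
    PySem.List.enumerate_eq_map_pyRange ((PySem.List.pyGetD tm y []).take w.toNat) '?',
    List.foldl_map]
  set row := PySem.List.pyGetD tm y [] with hrowdef
  set m : Int := PySem.List.len (row.take w.toNat) with hmdef
  have hm0 : 0 ≤ m := by rw [hmdef]; exact pvLen_nonneg _
  have hmw : m ≤ w := by
    rw [hmdef]
    simp only [PySem.List.len, List.length_take]
    omega
  rw [PySem.List.pyRange_one_append 0 m w hm0 hmw, List.foldl_append]
  -- the tail of A's scan beyond the row's end inserts nothing
  have htail : ∀ g' : PySem.Dict String (List (String × Int)),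
      (PySem.List.pyRange m w 1).foldl (fun g x =>
        if PySem.Chars.isIn [pvTileAt tm y x] ('@' :: (pvKeyTiles ++ pvDoorTiles)) then
          g.insert (String.ofList [pvTileAt tm y x])
            (pvBfsExitsB tm (PySem.List.len tm) w x y).items
        else g) g' = g' := by
    intro g'
    apply pvFoldlFixed
    intro x hx
    rw [PySem.List.mem_pyRange_one] at hx
    have hxr : ¬ x.toNat < (tm.getD y.toNat []).length := by
      intro hlt
      have hrl : (tm.getD y.toNat []).length = row.length := by
        rw [hrowdef, PySem.List.pyGetD_of_nonneg _ _ hy.1]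
      have h1 : x.toNat < (row.take w.toNat).length := by
        rw [List.length_take]
        omega
      have h2 : x < m := by
        rw [hmdef]
        simp only [PySem.List.len]
        omega
      omega
    rw [pvTileAt_default tm y x (le_trans hm0 hx.1) hy.1 hxr]
    rw [show PySem.Chars.isIn ['?'] ('@' :: (pvKeyTiles ++ pvDoorTiles)) = false from by decide]
    rfl
  rw [htail]
  apply PySem.List.foldl_congr_mem
  intro g' x hx
  rw [PySem.List.mem_pyRange_one] at hx
  have hread : PySem.List.pyGetD (row.take w.toNat) x '?' = pvTileAt tm y x := by
    rw [pvTake_read row w x hx.1 hx.2]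
    rw [pvTileAt, hrowdef, PySem.List.pyGetD_of_nonneg _ _ hy.1]
    rw [PySem.List.pyGetD_of_nonneg _ _ hx.1]
  simp only [hread]
  rw [pvMem_lm]
  by_cases hlm : (pvTileAt tm y x == '@' || pvLet (pvTileAt tm y x)) = true
  · rw [if_pos hlm, if_pos hlm]
    have hBfs : pvBfsExitsB tm (PySem.List.len tm) w x y
        = pvBfs grid (PySem.List.len tm) w (pvTileAt tm y x)
            ((PySem.List.len tm * w).toNat + 2) (PySem.Set.ofList [(y, x)]) [(y, x)] 0
            PySem.Dict.empty := by
      show pvLoopB tm (PySem.List.len tm) w (pvTileAt tm y x)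
          ((PySem.List.len tm * w).toNat + 2) (PySem.Set.ofList [(x, y)]) [(x, y)] 0
          PySem.Dict.empty = _
      rw [pvOfList_singleton]
      have hrel := pvLoopRel tm grid (PySem.List.len tm) w
        (hgdef ▸ pvCompat_crop tm w hw) (pvTileAt tm y x)
        ((PySem.List.len tm * w).toNat + 2) [(x, y)] [(x, y)]
        (PySem.Set.ofList [(y, x)]) 0 PySem.Dict.empty ?_
      · rw [hrel]
        rfl
      · intro n
        rw [pvOfList_singleton, List.mem_singleton, List.mem_singleton]
        constructor
        · rintro rfl; rfl
        · intro h1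
          have h2 := congrArg Prod.swap h1
          rwa [Prod.swap_swap] at h2
    rw [hBfs]
  · rw [if_neg (by simpa using hlm), if_neg (by simpa using hlm)]

set_option maxHeartbeats 2000000 in
theorem pvMid_eq_alt (tiles : String) : pvGraphMid tiles = graph_from_tiles_alt tiles := by
  simp only [pvGraphMid, graph_from_tiles_alt]
  exact congrArg PySem.Dict.items (pvFold_eq _)

theorem pvGraph_eq (tiles : String) : graph_from_tiles tiles = graph_from_tiles_alt tiles :=
  (pvGraph_eq_mid tiles).trans (pvMid_eq_alt tiles)

-- ===== VERDICT (by name: the statement is the Claim_ definition above) =====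
theorem graph_from_tiles_spec : Claim_equal_graph_from_tiles := by
  intro tiles _ _
  unfold Spec_graph_from_tiles
  exact pvGraph_eq tiles
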